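-- pv_equiv track=rewrite | github.com/ParkJeongmiin/Algorithm | 프로그래머스/2/250136. ［PCCP 기출문제］ 2번 ／ 석유 시추/［PCCP 기출문제］ 2번 ／ 석유 시추.py | solution
-- ===== SOURCE A (Python) =====
-- from collections import deque
--
-- def cal_size(i, j, land, visited, result):
--     """
--     하나의 덩어리 크기를 계산하는 함수
--     """
--     size = 1
--     queue = deque()
--     queue.append([i, j])
--     visited[i][j] = True
--
--     min_x, max_x = j, j
--
--     dy = [-1, 1, 0, 0]
--     dx = [0, 0, -1, 1]
--
--     while queue:
--         y, x = queue.popleft()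
--
--         min_x = min(min_x, x)
--         max_x = max(max_x, x)
--
--         for i in range(4):
--             ny = y + dy[i]
--             nx = x + dx[i]
--
--             if 0 <= ny < len(land) and 0 <= nx < len(land[0]):
--                 if land[ny][nx] and not visited[ny][nx]:
--                         visited[ny][nx] = True
--                         queue.append((ny, nx))
--                         size += 1
--
--     for i in range(min_x, max_x + 1):
--         result[i] += size
--
--     return result
--
-- def solution(land):
--     n, m = len(land), len(land[0])
--     result = [0 for _ in range(m)]
--     visited = [[False] * m for _ in range(n)]
--
--     for j in range(m):
--         total = 0
--
--         for i in range(n):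
--             if land[i][j] and not visited[i][j]:
--                 cal_size(i, j, land, visited, result)
--
--     return max(result)
-- ===== SOURCE B (Python) =====
-- def solution(land):
--     n, m = len(land), len(land[0])
--
--     # union-find over cells, indexed column-major: idx(i, j) = j*n + i,
--     # so a component's root is the smallest index = its first cell column by column
--     parent = list(range(n * m))
--
--     def find(x):
--         while parent[x] != x:
--             x = parent[x]
--         return x
--
--     def union(a, b):
--         ra, rb = find(a), find(b)
--         if ra < rb:
--             parent[rb] = ra
--         elif rb < ra:
--             parent[ra] = rb
--
--     for j in range(m):
--         for i in range(n):
--             if land[i][j]: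
--                 if j + 1 < m and land[i][j + 1]:
--                     union(j * n + i, (j + 1) * n + i)
--                 if i + 1 < n and land[i + 1][j]:
--                     union(j * n + i, j * n + i + 1)
--
--     # per-root aggregation: component size and min/max column touched
--     size, lo, hi = {}, {}, {}
--     for j in range(m):
--         for i in range(n):
--             if land[i][j]:
--                 r = find(j * n + i)
--                 size[r] = size.get(r, 0) + 1
--                 lo[r] = min(lo.get(r, j), j)
--                 hi[r] = max(hi.get(r, j), j)
--
--     result = [0] * m
--     for r in size:
--         for c in range(lo[r], hi[r] + 1):
--             result[c] += size[r]
--     return max(result)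
-- ===== Notes on version B (the rewrite author's own statement) =====
-- stated objective: alternative
-- what changed: A flood-fills each component with a BFS over a visited matrix and adds into the per-column result array as it scans; B instead builds a union-find over all cells (root = smallest column-major index), aggregates per-root component size and min/max column into dictionaries in a second pass, and fills the column array from those triples at the end.
import Mathlib
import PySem

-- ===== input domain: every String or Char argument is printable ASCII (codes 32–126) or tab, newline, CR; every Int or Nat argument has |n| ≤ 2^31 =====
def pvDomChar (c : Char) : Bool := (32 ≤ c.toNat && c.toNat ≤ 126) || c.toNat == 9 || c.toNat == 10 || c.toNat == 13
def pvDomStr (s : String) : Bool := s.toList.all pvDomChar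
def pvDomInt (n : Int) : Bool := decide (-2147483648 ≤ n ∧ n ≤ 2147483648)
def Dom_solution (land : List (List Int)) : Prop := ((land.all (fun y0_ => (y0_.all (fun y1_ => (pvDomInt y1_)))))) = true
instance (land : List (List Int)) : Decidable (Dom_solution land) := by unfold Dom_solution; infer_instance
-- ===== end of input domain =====

-- B replaces A's per-seed BFS flood fill (deque + visited matrix, adding into the
-- result array as it scans) with a union-find over all cells (root = smallest
-- column-major index) followed by a per-root dictionary aggregation of component
-- size and min/max column (objective: alternative — a different data structure).

-- shared grid accessors (Python's land[y][x] / visited[y][x] reads and writes)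
def lget (land : List (List Int)) (y x : Int) : Int :=
  (land.getD y.toNat []).getD x.toNat 0

def vget (v : List (List Bool)) (y x : Int) : Bool :=
  (v.getD y.toNat []).getD x.toNat false

def vset (v : List (List Bool)) (y x : Int) : List (List Bool) :=
  v.set y.toNat ((v.getD y.toNat []).set x.toNat true)

def inb (n m : Nat) (y x : Int) : Bool :=
  decide (0 ≤ y) && decide (y < (n : Int)) && decide (0 ≤ x) && decide (x < (m : Int))

-- ===== PORT A =====

-- body of 'for i in range(4): …' in cal_size (one candidate neighbour, relative offset)
def nbrStepA (land : List (List Int)) (y x : Int) :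
    List (List Bool) × List (Int × Int) × Nat → Int × Int →
    List (List Bool) × List (Int × Int) × Nat
  | (vis, q, size), d =>
    let ny := y + d.1
    let nx := x + d.2
    if inb land.length (land.getD 0 []).length ny nx &&
        (lget land ny nx != 0) && !(vget vis ny nx) then
      (vset vis ny nx, q ++ [(ny, nx)], size + 1)
    else (vis, q, size)

-- the BFS while-loop of cal_size (queue popped at the front); fuel bounds iterations
def loopA (land : List (List Int)) :
    Nat → List (List Bool) → List (Int × Int) → Nat → Int → Int →
    List (List Bool) × Nat × Int × Int
  | 0, vis, _, size, mn, mx => (vis, size, mn, mx)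
  | _ + 1, vis, [], size, mn, mx => (vis, size, mn, mx)
  | fuel + 1, vis, (y, x) :: rest, size, mn, mx =>
      let mn' := min mn x
      let mx' := max mx x
      let st := (List.zip [-1, 1, 0, 0] [0, 0, -1, 1]).foldl (nbrStepA land y x)
        (vis, rest, size)
      loopA land fuel st.1 st.2.1 st.2.2 mn' mx'

-- cal_size: mark seed, BFS, then 'for i in range(min_x, max_x+1): result[i] += size'
def calSize (land : List (List Int)) (i j : Int) (vis : List (List Bool))
    (result : List Int) : List (List Bool) × List Int :=
  let vis1 := vset vis i j
  let r := loopA land (land.length * (land.getD 0 []).length + 1) vis1 [(i, j)] 1 j j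
  let result' := (PySem.List.pyRange r.2.2.1 (r.2.2.2 + 1) 1).foldl
    (fun res k => res.set k.toNat (res.getD k.toNat 0 + (r.2.1 : Int))) result
  (r.1, result')

def solution (land : List (List Int)) : Int :=
  let n := land.length
  let m := (land.getD 0 []).length
  let init : List (List Bool) × List Int :=
    (List.replicate n (List.replicate m false), List.replicate m (0 : Int))
  let fin := (PySem.List.pyRange 0 (m : Int) 1).foldl (fun st j =>
    (PySem.List.pyRange 0 (n : Int) 1).foldl (fun st i =>
      if lget land i j != 0 && !(vget st.1 i j) then calSize land i j st.1 st.2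
      else st) st) init
  (PySem.List.max? fin.2 (fun y => y)).getD 0

-- ===== PORT B =====

-- find: 'while parent[x] != x: x = parent[x]; return x' (fuel bounds the while loop;
-- n*m iterations always suffice because parent[k] ≤ k throughout)
def findRoot (parent : List Int) : Nat → Int → Int
  | 0, x => x
  | fuel + 1, x =>
      if parent.getD x.toNat 0 == x then x
      else findRoot parent fuel (parent.getD x.toNat 0)

-- union: link the larger root below the smaller one
def unionDSU (parent : List Int) (fuel : Nat) (a b : Int) : List Int :=
  let ra := findRoot parent fuel a
  let rb := findRoot parent fuel b
  if ra < rb then parent.set rb.toNat ra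
  else if rb < ra then parent.set ra.toNat rb
  else parent

def solution_alt (land : List (List Int)) : Int :=
  let n := land.length
  let m := (land.getD 0 []).length
  let nm := n * m
  let parent0 : List Int := PySem.List.pyRange 0 (nm : Int) 1
  let parent := (PySem.List.pyRange 0 (m : Int) 1).foldl (fun p j =>
    (PySem.List.pyRange 0 (n : Int) 1).foldl (fun p i =>
      if lget land i j != 0 then
        let p1 := if decide (j + 1 < (m : Int)) && (lget land i (j + 1) != 0) then
          unionDSU p nm (j * (n : Int) + i) ((j + 1) * (n : Int) + i) else p
        let p2 := if decide (i + 1 < (n : Int)) && (lget land (i + 1) j != 0) then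
          unionDSU p1 nm (j * (n : Int) + i) (j * (n : Int) + i + 1) else p1
        p2
      else p) p) parent0
  let dicts := (PySem.List.pyRange 0 (m : Int) 1).foldl (fun st j =>
    (PySem.List.pyRange 0 (n : Int) 1).foldl (fun st i =>
      if lget land i j != 0 then
        let r := findRoot parent nm (j * (n : Int) + i)
        (st.1.insert r (st.1.getD r 0 + 1),
         st.2.1.insert r (min (st.2.1.getD r j) j),
         st.2.2.insert r (max (st.2.2.getD r j) j))
      else st) st)
    ((PySem.Dict.empty : PySem.Dict Int Int), (PySem.Dict.empty : PySem.Dict Int Int),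
     (PySem.Dict.empty : PySem.Dict Int Int))
  let result := dicts.1.keys.foldl (fun res r =>
    (PySem.List.pyRange (dicts.2.1.getD r 0) (dicts.2.2.getD r 0 + 1) 1).foldl
      (fun res c => res.set c.toNat (res.getD c.toNat 0 + dicts.1.getD r 0)) res)
    (List.replicate m (0 : Int))
  (PySem.List.max? result (fun y => y)).getD 0

-- ===== PRECONDITION & SPEC =====

-- Pre_ excludes exactly the inputs on which the Python A raises: an empty outer list,
-- an empty first row, and grids with a row shorter than the first row.
def Pre_solution (land : List (List Int)) : Prop :=
  land ≠ [] ∧ (land.getD 0 []).length ≥ 1 ∧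
    ∀ row ∈ land, (land.getD 0 []).length ≤ row.length

instance (land : List (List Int)) : Decidable (Pre_solution land) := by
  unfold Pre_solution; infer_instance

def pvWitness_solution : List (List Int) := [[1, 0, 1], [1, 1, 0]]

def Spec_solution (land : List (List Int)) (out : Int) : Prop := out = solution_alt land
instance (land : List (List Int)) (out : Int) : Decidable (Spec_solution land out) := by
  unfold Spec_solution; infer_instance

-- ===== CLAIM (what is proved, stated in full; the proofs are below) =====
def Claim_equal_solution : Prop := ∀ (land : List (List Int)), Dom_solution land →
  Pre_solution land → Spec_solution land (solution land)

-- ===== LEMMAS AND PROOFS =====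

/- Abstract view of the grid: cells are (row, column) pairs of integers. -/

def InGrid (n m : Nat) (c : Int × Int) : Prop :=
  0 ≤ c.1 ∧ c.1 < (n : Int) ∧ 0 ≤ c.2 ∧ c.2 < (m : Int)

def OilP (land : List (List Int)) (c : Int × Int) : Prop :=
  InGrid land.length (land.getD 0 []).length c ∧ lget land c.1 c.2 ≠ 0

def AdjP (c d : Int × Int) : Prop :=
  (c.1 = d.1 ∧ (c.2 = d.2 + 1 ∨ d.2 = c.2 + 1)) ∨
    (c.2 = d.2 ∧ (c.1 = d.1 + 1 ∨ d.1 = c.1 + 1))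

/- One step of reachability: move to an adjacent oil cell not visited in `v0`. -/
def EP (land : List (List Int)) (v0 : List (List Bool)) (c d : Int × Int) : Prop :=
  AdjP c d ∧ OilP land d ∧ vget v0 d.1 d.2 = false

def ReachP (land : List (List Int)) (v0 : List (List Bool)) (s c : Int × Int) : Prop :=
  Relation.ReflTransGen (EP land v0) s c

def Wf (v : List (List Bool)) (n m : Nat) : Prop :=
  v.length = n ∧ ∀ row ∈ v, row.length = m

/- `vis` marks exactly `v0` plus the cells of `M` (inside the grid). -/
def Mchar (v0 : List (List Bool)) (n m : Nat) (vis : List (List Bool))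
    (M : Finset (Int × Int)) : Prop :=
  ∀ c : Int × Int, InGrid n m c →
    (vget vis c.1 c.2 = true ↔ vget v0 c.1 c.2 = true ∨ c ∈ M)

def gridF (n m : Nat) : Finset (Int × Int) :=
  ((Finset.range n) ×ˢ (Finset.range m)).image (fun p => ((p.1 : Int), (p.2 : Int)))

lemma mem_gridF {n m : Nat} {c : Int × Int} : c ∈ gridF n m ↔ InGrid n m c := by
  obtain ⟨c1, c2⟩ := c
  simp only [gridF, Finset.mem_image, Finset.mem_product, Finset.mem_range, Prod.mk.injEq,
    Prod.exists, InGrid]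
  constructor
  · rintro ⟨a, b, ⟨ha, hb⟩, rfl, rfl⟩
    refine ⟨by positivity, by exact_mod_cast ha, by positivity, by exact_mod_cast hb⟩
  · rintro ⟨h1, h2, h3, h4⟩
    exact ⟨c1.toNat, c2.toNat, ⟨by omega, by omega⟩, by omega, by omega⟩

lemma card_gridF (n m : Nat) : (gridF n m).card = n * m := by
  rw [gridF, Finset.card_image_of_injective _ (by intro a b h; simpa [Prod.ext_iff] using h)]
  simp

/- basic vget/vset lemmas -/

lemma vget_eq (v : List (List Bool)) (y x : Int) :
    vget v y x = ((v[y.toNat]?).getD [])[x.toNat]?.getD false := by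
  simp [vget, List.getD]

lemma wf_vset {v : List (List Bool)} {n m : Nat} (h : Wf v n m) (y x : Int) :
    Wf (vset v y x) n m := by
  obtain ⟨hl, hr⟩ := h
  by_cases hy : y.toNat < v.length
  · refine ⟨by simpa [vset] using hl, ?_⟩
    intro row hrow
    rcases List.mem_or_eq_of_mem_set hrow with h1 | h1
    · exact hr row h1
    · subst h1
      have : v.getD y.toNat [] = v[y.toNat] := List.getD_eq_getElem v [] hy
      rw [this]
      simpa using hr _ (List.getElem_mem hy)
  · rw [vset, List.set_eq_of_length_le (by omega)]
    exact ⟨hl, hr⟩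

lemma vget_vset_self {v : List (List Bool)} {n m : Nat} (h : Wf v n m)
    {c : Int × Int} (hc : InGrid n m c) : vget (vset v c.1 c.2) c.1 c.2 = true := by
  obtain ⟨hl, hr⟩ := h
  obtain ⟨h1, h2, h3, h4⟩ := hc
  have hy : c.1.toNat < v.length := by omega
  have hrow : v.getD c.1.toNat [] = v[c.1.toNat] := List.getD_eq_getElem v [] hy
  have hx : c.2.toNat < (v[c.1.toNat]).length := by
    rw [hr _ (List.getElem_mem hy)]; omega
  rw [vget_eq, vset, hrow]
  rw [List.getElem?_set_self (by simpa using hy)]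
  simp [List.getElem?_set_self (by simpa using hx)]

lemma vget_vset_ne {v : List (List Bool)} {c d : Int × Int}
    (hc : 0 ≤ c.1 ∧ 0 ≤ c.2) (hd : 0 ≤ d.1 ∧ 0 ≤ d.2) (hne : c ≠ d) :
    vget (vset v c.1 c.2) d.1 d.2 = vget v d.1 d.2 := by
  rw [vget_eq, vget_eq, vset]
  by_cases hy : c.1.toNat = d.1.toNat
  · have hy' : c.1 = d.1 := by omega
    have hx : c.2.toNat ≠ d.2.toNat := by
      have : c.2 ≠ d.2 := by
        intro h; exact hne (Prod.ext hy' h)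
      omega
    rw [hy]
    by_cases hlt : d.1.toNat < v.length
    · rw [List.getElem?_set_self (by simpa using hlt)]
      have : v.getD d.1.toNat [] = v[d.1.toNat] := List.getD_eq_getElem v [] hlt
      rw [this]
      simp [List.getElem?_set_ne hx, List.getElem?_eq_getElem hlt]
    · rw [List.set_eq_of_length_le (by omega)]
  · rw [List.getElem?_set_ne hy]

/- the neighbour-marking step shared by the BFS analysis -/
def markCell (land : List (List Int)) :
    List (List Bool) × List (Int × Int) → Int × Int →
    List (List Bool) × List (Int × Int)
  | (vis, q), c =>
    if inb land.length (land.getD 0 []).length c.1 c.2 &&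
        (lget land c.1 c.2 != 0) && !(vget vis c.1 c.2) then
      (vset vis c.1 c.2, q ++ [c])
    else (vis, q)

/- the guard of markCell / nbrStepA, read as a proposition -/
lemma cond_true_iff (land : List (List Int)) (vis : List (List Bool)) (c : Int × Int) :
    (inb land.length (land.getD 0 []).length c.1 c.2 &&
      (lget land c.1 c.2 != 0) && !(vget vis c.1 c.2)) = true ↔
    (OilP land c ∧ vget vis c.1 c.2 = false) := by
  simp [inb, OilP, InGrid, Bool.and_eq_true, bne_iff_ne]
  tauto

lemma mchar_vset {v0 vis : List (List Bool)} {n m : Nat} {M : Finset (Int × Int)}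
    {c : Int × Int} (hwf : Wf vis n m) (hch : Mchar v0 n m vis M) (hc : InGrid n m c) :
    Mchar v0 n m (vset vis c.1 c.2) (insert c M) := by
  intro e he
  by_cases hec : e = c
  · subst hec
    rw [vget_vset_self hwf hc]
    simp
  · rw [vget_vset_ne ⟨hc.1, hc.2.2.1⟩ ⟨he.1, he.2.2.1⟩ (fun h => hec (h ▸ rfl))]
    rw [hch e he]
    simp only [Finset.mem_insert]
    tauto

/- one pass of the neighbour-marking fold: freshly marked cells are exactly the
   oil cells of `cs` not yet visited, appended (distinct) to the worklist -/
lemma fold_mark (land : List (List Int)) (v0 : List (List Bool)) :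
    ∀ (cs : List (Int × Int)) (vis : List (List Bool)) (q : List (Int × Int))
      (M : Finset (Int × Int)),
    Wf vis land.length (land.getD 0 []).length →
    Mchar v0 land.length (land.getD 0 []).length vis M →
    q.Nodup → (∀ c ∈ q, c ∈ M) →
    (∀ c ∈ q, InGrid land.length (land.getD 0 []).length c ∧ vget vis c.1 c.2 = true) →
    ∃ vis' l M', cs.foldl (markCell land) (vis, q) = (vis', q ++ l) ∧
      Wf vis' land.length (land.getD 0 []).length ∧
      Mchar v0 land.length (land.getD 0 []).length vis' M' ∧
      M ⊆ M' ∧ (q ++ l).Nodup ∧ l.toFinset = M' \ M ∧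
      (∀ c ∈ q ++ l, c ∈ M') ∧
      (∀ c ∈ q ++ l, InGrid land.length (land.getD 0 []).length c ∧
        vget vis' c.1 c.2 = true) ∧
      (∀ d ∈ M' \ M, d ∈ cs ∧ OilP land d ∧ vget v0 d.1 d.2 = false) ∧
      (∀ d ∈ cs, OilP land d → vget v0 d.1 d.2 = false → d ∈ M') := by
  intro cs
  induction cs with
  | nil =>
      intro vis q M hwf hch hnd hqM hq2
      exact ⟨vis, [], M, by simp, hwf, hch, Finset.Subset.refl M, by simpa using hnd, by simp,
        by simpa using hqM, by simpa using hq2, by simp, by simp⟩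
  | cons c cs ih =>
      intro vis q M hwf hch hnd hqM hq2
      by_cases hcond : (inb land.length (land.getD 0 []).length c.1 c.2 &&
          (lget land c.1 c.2 != 0) && !(vget vis c.1 c.2)) = true
      · -- fresh cell: mark it, push it, insert into M
        obtain ⟨hoil, hfresh⟩ := (cond_true_iff land vis c).mp hcond
        have hcg : InGrid land.length (land.getD 0 []).length c := hoil.1
        have hcM : c ∉ M := by
          intro hmem
          have := (hch c hcg).mpr (Or.inr hmem)
          rw [hfresh] at this; exact Bool.false_ne_true this
        have hcv0 : vget v0 c.1 c.2 = false := by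
          by_contra h
          have : vget v0 c.1 c.2 = true := by
            cases hv : vget v0 c.1 c.2 <;> simp_all
          have := (hch c hcg).mpr (Or.inl this)
          rw [hfresh] at this; exact Bool.false_ne_true this
        have hcq : c ∉ q := by
          intro hmem
          have := (hq2 c hmem).2
          rw [hfresh] at this; exact Bool.false_ne_true this
        have step : markCell land (vis, q) c = (vset vis c.1 c.2, q ++ [c]) := by
          rw [markCell, if_pos hcond]
        have hwf1 : Wf (vset vis c.1 c.2) land.length (land.getD 0 []).length :=
          wf_vset hwf _ _
        have hch1 := mchar_vset hwf hch hcg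
        have hnd1 : (q ++ [c]).Nodup := by
          rw [List.nodup_append]
          refine ⟨hnd, List.nodup_singleton c, ?_⟩
          intro a ha b hb
          rw [List.mem_singleton] at hb
          subst hb
          exact fun h => hcq (h ▸ ha)
        have hqM1 : ∀ e ∈ q ++ [c], e ∈ insert c M := by
          intro e he
          rcases List.mem_append.mp he with h | h
          · exact Finset.mem_insert_of_mem (hqM e h)
          · simp at h; subst h; exact Finset.mem_insert_self _ _
        have hq21 : ∀ e ∈ q ++ [c], InGrid land.length (land.getD 0 []).length e ∧
            vget (vset vis c.1 c.2) e.1 e.2 = true := by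
          intro e he
          rcases List.mem_append.mp he with h | h
          · obtain ⟨hg, hv⟩ := hq2 e h
            have hec : c ≠ e := fun hh => hcq (hh ▸ h)
            refine ⟨hg, ?_⟩
            rw [vget_vset_ne ⟨hcg.1, hcg.2.2.1⟩ ⟨hg.1, hg.2.2.1⟩ hec]
            exact hv
          · simp at h; subst h
            exact ⟨hcg, vget_vset_self hwf hcg⟩
        obtain ⟨vis', l', M', heq, hwf', hch', hsub', hnd', hlf', hqM', hq2', hfr', hco'⟩ :=
          ih (vset vis c.1 c.2) (q ++ [c]) (insert c M) hwf1 hch1 hnd1 hqM1 hq21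
        refine ⟨vis', c :: l', M', ?_, hwf', hch', ?_, ?_, ?_, ?_, ?_, ?_, ?_⟩
        · rw [List.foldl_cons, step, heq, List.append_assoc]; rfl
        · exact fun e he => hsub' (Finset.mem_insert_of_mem he)
        · simpa [List.append_assoc] using hnd'
        · have hcM' : c ∈ M' := hsub' (Finset.mem_insert_self _ _)
          ext d
          simp only [List.toFinset_cons, Finset.mem_insert, List.mem_toFinset,
            Finset.mem_sdiff]
          constructor
          · rintro (rfl | hd)
            · exact ⟨hcM', hcM⟩
            · have := hlf' ▸ (List.mem_toFinset.mpr hd)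
              rw [Finset.mem_sdiff] at this
              simp only [Finset.mem_insert, not_or] at this
              exact ⟨this.1, this.2.2⟩
          · rintro ⟨hdM', hdM⟩
            by_cases hdc : d = c
            · exact Or.inl hdc
            · refine Or.inr (List.mem_toFinset.mp ?_)
              rw [hlf', Finset.mem_sdiff]
              simp only [Finset.mem_insert, not_or]
              exact ⟨hdM', hdc, hdM⟩
        · intro e he
          apply hqM'
          simpa [List.append_assoc] using he
        · intro e he
          apply hq2'
          simpa [List.append_assoc] using he
        · intro d hd
          rw [Finset.mem_sdiff] at hd
          by_cases hdc : d = c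
          · subst hdc; exact ⟨List.mem_cons_self, hoil, hcv0⟩
          · have : d ∈ M' \ insert c M := by
              rw [Finset.mem_sdiff]
              simp only [Finset.mem_insert, not_or]
              exact ⟨hd.1, hdc, hd.2⟩
            obtain ⟨h1, h2, h3⟩ := hfr' _ this
            exact ⟨List.mem_cons_of_mem _ h1, h2, h3⟩
        · intro d hd hdo hdv
          rcases List.mem_cons.mp hd with rfl | hmem
          · exact hsub' (Finset.mem_insert_self _ _)
          · exact hco' d hmem hdo hdv
      · -- guard false: nothing marked at this step
        have step : markCell land (vis, q) c = (vis, q) := by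
          rw [markCell, if_neg hcond]
        obtain ⟨vis', l', M', heq, hwf', hch', hsub', hnd', hlf', hqM', hq2', hfr', hco'⟩ :=
          ih vis q M hwf hch hnd hqM hq2
        refine ⟨vis', l', M', by rw [List.foldl_cons, step]; exact heq,
          hwf', hch', hsub', hnd', hlf', hqM', hq2', ?_, ?_⟩
        · intro d hd
          obtain ⟨h1, h2, h3⟩ := hfr' d hd
          exact ⟨List.mem_cons_of_mem _ h1, h2, h3⟩
        · intro d hd hdo hdv
          rcases List.mem_cons.mp hd with rfl | hmem
          · -- guard was false although d is fresh oil: it must already be visited, so in M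
            rw [cond_true_iff] at hcond
            have hvis : vget vis d.1 d.2 = true := by
              rcases Bool.eq_false_or_eq_true (vget vis d.1 d.2) with hv | hv
              · exact hv
              · exact absurd ⟨hdo, hv⟩ hcond
            rcases (hch d hdo.1).mp hvis with h | h
            · rw [hdv] at h; exact absurd h Bool.false_ne_true
            · exact hsub' h
          · exact hco' d hmem hdo hdv


lemma adjP_iff (y x : Int) (d : Int × Int) :
    AdjP (y, x) d ↔ (d = (y - 1, x) ∨ d = (y + 1, x) ∨ d = (y, x - 1) ∨ d = (y, x + 1)) := by
  obtain ⟨d1, d2⟩ := d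
  simp only [AdjP, Prod.mk.injEq]
  omega

lemma mem_csA (y x : Int) (d : Int × Int) :
    d ∈ ((List.zip [-1, 1, 0, 0] [0, 0, -1, 1]).map
      (fun e : Int × Int => (y + e.1, x + e.2))) ↔ AdjP (y, x) d := by
  obtain ⟨d1, d2⟩ := d
  simp only [List.zip, List.zipWith, List.map, List.mem_cons, List.not_mem_nil, or_false,
    Prod.mk.injEq, adjP_iff]
  omega

lemma reach_closed {land : List (List Int)} {v0 : List (List Bool)} {s c : Int × Int}
    {S : Finset (Int × Int)} (hSs : s ∈ S)
    (hcl : ∀ c ∈ S, ∀ d, EP land v0 c d → d ∈ S) (h : ReachP land v0 s c) : c ∈ S := by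
  induction h with
  | refl => exact hSs
  | tail h1 h2 ih => exact hcl _ ih _ h2

/- the loop invariant of A's flood loop -/
structure FloodInv (land : List (List Int)) (v0 : List (List Bool)) (s : Int × Int)
    (vis : List (List Bool)) (q : List (Int × Int)) (M : Finset (Int × Int)) : Prop where
  wf : Wf vis land.length (land.getD 0 []).length
  char : Mchar v0 land.length (land.getD 0 []).length vis M
  nodup : q.Nodup
  qM : ∀ c ∈ q, c ∈ M
  Moil : ∀ c ∈ M, OilP land c ∧ vget v0 c.1 c.2 = false
  MR : ∀ c ∈ M, ReachP land v0 s c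
  sM : s ∈ M
  closed : ∀ c ∈ M, c ∉ q → ∀ d, EP land v0 c d → d ∈ M

lemma FloodInv.q2 {land : List (List Int)} {v0 : List (List Bool)} {s : Int × Int}
    {vis : List (List Bool)} {q : List (Int × Int)} {M : Finset (Int × Int)}
    (hI : FloodInv land v0 s vis q M) :
    ∀ c ∈ q, InGrid land.length (land.getD 0 []).length c ∧ vget vis c.1 c.2 = true := by
  intro c hc
  have hM := hI.qM c hc
  have hg : InGrid land.length (land.getD 0 []).length c := (hI.Moil c hM).1.1
  exact ⟨hg, (hI.char c hg).mpr (Or.inr hM)⟩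

lemma FloodInv.Mgrid {land : List (List Int)} {v0 : List (List Bool)} {s : Int × Int}
    {vis : List (List Bool)} {q : List (Int × Int)} {M : Finset (Int × Int)}
    (hI : FloodInv land v0 s vis q M) :
    M ⊆ gridF land.length (land.getD 0 []).length := by
  intro c hc
  exact mem_gridF.mpr (hI.Moil c hc).1.1

/- the fold of markCell only appends to the worklist -/
lemma fold_snd_append (land : List (List Int)) :
    ∀ (cs : List (Int × Int)) (vis : List (List Bool)) (q : List (Int × Int)),
    ∃ l, (cs.foldl (markCell land) (vis, q)).2 = q ++ l := by
  intro cs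
  induction cs with
  | nil => exact fun vis q => ⟨[], by simp⟩
  | cons c cs ih =>
      intro vis q
      rw [List.foldl_cons, markCell]
      split
      · obtain ⟨l, hl⟩ := ih (vset vis c.1 c.2) (q ++ [c])
        exact ⟨c :: l, by rw [hl, List.append_assoc]; rfl⟩
      · exact ih vis q

lemma markCell_eq (land : List (List Int)) (vis : List (List Bool))
    (q : List (Int × Int)) (a b : Int) :
    markCell land (vis, q) (a, b) =
      if (inb land.length (land.getD 0 []).length a b &&
          (lget land a b != 0) && !(vget vis a b)) = true
      then (vset vis a b, q ++ [(a, b)])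
      else (vis, q) := rfl

/- A's neighbour fold is the markCell fold plus enqueue-counting -/
lemma foldA_eq (land : List (List Int)) (y x : Int) :
    ∀ (ds : List (Int × Int)) (vis : List (List Bool)) (q : List (Int × Int)) (size : Nat),
    ds.foldl (nbrStepA land y x) (vis, q, size) =
      (((ds.map (fun e : Int × Int => (y + e.1, x + e.2))).foldl (markCell land) (vis, q)).1,
       ((ds.map (fun e : Int × Int => (y + e.1, x + e.2))).foldl (markCell land) (vis, q)).2,
       size + (((ds.map (fun e : Int × Int => (y + e.1, x + e.2))).foldl (markCell land)
         (vis, q)).2.length - q.length)) := by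
  intro ds
  induction ds with
  | nil => intro vis q size; simp
  | cons d ds ih =>
      intro vis q size
      rw [List.map_cons, List.foldl_cons, List.foldl_cons]
      have hguard : nbrStepA land y x (vis, q, size) d =
          if (inb land.length (land.getD 0 []).length (y + d.1) (x + d.2) &&
              (lget land (y + d.1) (x + d.2) != 0) && !(vget vis (y + d.1) (x + d.2))) = true
          then (vset vis (y + d.1) (x + d.2), q ++ [(y + d.1, x + d.2)], size + 1)
          else (vis, q, size) := rfl
      by_cases hc : (inb land.length (land.getD 0 []).length (y + d.1) (x + d.2) &&
          (lget land (y + d.1) (x + d.2) != 0) && !(vget vis (y + d.1) (x + d.2))) = true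
      · rw [hguard, if_pos hc, markCell_eq, if_pos hc, ih]
        obtain ⟨l, hl⟩ := fold_snd_append land
          (ds.map (fun e : Int × Int => (y + e.1, x + e.2))) (vset vis (y + d.1) (x + d.2))
          (q ++ [(y + d.1, x + d.2)])
        have hlen : (List.foldl (markCell land)
            (vset vis (y + d.1) (x + d.2), q ++ [(y + d.1, x + d.2)])
            (ds.map (fun e : Int × Int => (y + e.1, x + e.2)))).2.length ≥ q.length + 1 := by
          rw [hl]; simp
        have h3 : ∀ (a : List (List Bool)) (b : List (Int × Int)) (c1 c2 : Nat),
            c1 = c2 → (a, b, c1) = (a, b, c2) := by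
          intro a b c1 c2 h
          rw [h]
        apply h3
        simp only [List.length_append, List.length_cons, List.length_nil] at hlen ⊢
        omega
      · rw [hguard, if_neg hc, markCell_eq, if_neg hc, ih]


/- characterization of the final state of A's BFS loop -/
lemma loopA_spec (land : List (List Int)) (v0 : List (List Bool)) (s : Int × Int) :
    ∀ (fuel : Nat) (vis : List (List Bool)) (q : List (Int × Int)) (M : Finset (Int × Int))
      (size : Nat) (mn mx : Int),
    FloodInv land v0 s vis q M →
    size = M.card →
    ((insert s (M \ q.toFinset)).image Prod.snd).min = (mn : WithTop Int) →
    ((insert s (M \ q.toFinset)).image Prod.snd).max = (mx : WithBot Int) →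
    land.length * (land.getD 0 []).length + 1 ≤ fuel + (M \ q.toFinset).card →
    ∃ vis' M' mn' mx',
      loopA land fuel vis q size mn mx = (vis', M'.card, mn', mx') ∧
      Wf vis' land.length (land.getD 0 []).length ∧
      Mchar v0 land.length (land.getD 0 []).length vis' M' ∧
      (↑M' : Set (Int × Int)) = {c | ReachP land v0 s c} ∧
      ((M'.image Prod.snd).min = (mn' : WithTop Int)) ∧
      ((M'.image Prod.snd).max = (mx' : WithBot Int)) := by
  intro fuel
  induction fuel with
  | zero =>
      intro vis q M size mn mx hI hsz hmn hmx hfuel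
      exfalso
      have h1 : (M \ q.toFinset).card ≤
          (gridF land.length (land.getD 0 []).length).card :=
        Finset.card_le_card (Finset.Subset.trans Finset.sdiff_subset hI.Mgrid)
      rw [card_gridF] at h1
      omega
  | succ fuel ih =>
      intro vis q M size mn mx hI hsz hmn hmx hfuel
      rcases q with _ | ⟨⟨y, x⟩, rest⟩
      · -- empty worklist: the loop returns, M is the whole component
        simp only [List.toFinset_nil, Finset.sdiff_empty,
          Finset.insert_eq_self.mpr hI.sM] at hmn hmx
        refine ⟨vis, M, mn, mx, ?_, hI.wf, hI.char, ?_, hmn, hmx⟩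
        · rw [hsz]; rfl
        · ext c
          simp only [Set.mem_setOf_eq, Finset.mem_coe]
          constructor
          · exact fun h => hI.MR c h
          · exact reach_closed hI.sM
              (fun a ha d hd => hI.closed a ha (List.not_mem_nil) d hd)
      · -- pop (y, x) from the front
        have hstep : loopA land (fuel + 1) vis ((y, x) :: rest) size mn mx =
            loopA land fuel
              ((List.zip [-1, 1, 0, 0] [0, 0, -1, 1]).foldl (nbrStepA land y x)
                (vis, rest, size)).1
              ((List.zip [-1, 1, 0, 0] [0, 0, -1, 1]).foldl (nbrStepA land y x)
                (vis, rest, size)).2.1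
              ((List.zip [-1, 1, 0, 0] [0, 0, -1, 1]).foldl (nbrStepA land y x)
                (vis, rest, size)).2.2
              (min mn x) (max mx x) := rfl
        rw [foldA_eq] at hstep
        have hndrest : rest.Nodup := (List.nodup_cons.mp hI.nodup).2
        have hyxrest : (y, x) ∉ rest := (List.nodup_cons.mp hI.nodup).1
        have hyxM : (y, x) ∈ M := hI.qM _ List.mem_cons_self
        obtain ⟨vis', l, M', heq, hwf', hch', hsub', hnd', hlf', hqM', hq2', hfr', hco'⟩ :=
          fold_mark land v0
            ((List.zip [-1, 1, 0, 0] [0, 0, -1, 1]).map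
              (fun e : Int × Int => (y + e.1, x + e.2)))
            vis rest M hI.wf hI.char hndrest
            (fun c hc => hI.qM c (List.mem_cons_of_mem _ hc))
            (fun c hc => hI.q2 c (List.mem_cons_of_mem _ hc))
        rw [heq] at hstep
        have hlnd : l.Nodup := (List.nodup_append.mp hnd').2.1
        have hfreshM : ∀ d ∈ l, d ∉ M := by
          intro d hd hdM
          have := List.mem_toFinset.mpr hd
          rw [hlf', Finset.mem_sdiff] at this
          exact this.2 hdM
        have hyxl : (y, x) ∉ l := fun h => hfreshM _ h hyxM
        -- the new invariant
        have hI' : FloodInv land v0 s vis' (rest ++ l) M' := by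
          refine ⟨hwf', hch', hnd', hqM', ?_, ?_, hsub' hI.sM, ?_⟩
          · intro c hc
            by_cases hcM : c ∈ M
            · exact hI.Moil c hcM
            · have : c ∈ M' \ M := Finset.mem_sdiff.mpr ⟨hc, hcM⟩
              obtain ⟨_, h2, h3⟩ := hfr' c this
              exact ⟨h2, h3⟩
          · intro c hc
            by_cases hcM : c ∈ M
            · exact hI.MR c hcM
            · have : c ∈ M' \ M := Finset.mem_sdiff.mpr ⟨hc, hcM⟩
              obtain ⟨h1, h2, h3⟩ := hfr' c this
              have hadj : AdjP (y, x) c := (mem_csA y x c).mp h1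
              exact (hI.MR _ hyxM).tail ⟨hadj, h2, h3⟩
          · intro a haM' hanq d hEd
            by_cases haM : a ∈ M
            · by_cases hay : a = (y, x)
              · subst hay
                exact hco' d ((mem_csA y x d).mpr hEd.1) hEd.2.1 hEd.2.2
              · have hanrest : a ∉ rest := fun h => hanq (List.mem_append.mpr (Or.inl h))
                have : a ∉ (y, x) :: rest := by
                  intro h
                  rcases List.mem_cons.mp h with h | h
                  · exact hay h
                  · exact hanrest h
                exact hsub' (hI.closed a haM this d hEd)
            · exfalso
              have : a ∈ M' \ M := Finset.mem_sdiff.mpr ⟨haM', haM⟩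
              have := hlf' ▸ this
              exact hanq (List.mem_append.mpr (Or.inr (List.mem_toFinset.mp this)))
        -- size bookkeeping
        have hsz' : size + ((rest ++ l).length - rest.length) = M'.card := by
          have hcard : (M' \ M).card + M.card = M'.card :=
            Finset.card_sdiff_add_card_eq_card hsub'
          have hlc : l.toFinset.card = l.length := List.toFinset_card_of_nodup hlnd
          rw [hlf'] at hlc
          simp only [List.length_append]
          omega
        -- popped set grows by (y, x)
        have hP' : M' \ (rest ++ l).toFinset = insert (y, x) (M \ ((y, x) :: rest).toFinset) := by
          ext d
          simp only [Finset.mem_sdiff, Finset.mem_insert, List.mem_toFinset,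
            List.toFinset_append, List.toFinset_cons, Finset.mem_union,
            Finset.mem_insert, List.mem_toFinset]
          constructor
          · rintro ⟨hdM', hd⟩
            push Not at hd
            obtain ⟨hdrest, hdl⟩ := hd
            have hdM : d ∈ M := by
              by_contra hdM
              exact hdl (List.mem_toFinset.mp ((hlf'.symm ▸ Finset.mem_sdiff.mpr ⟨hdM', hdM⟩)))
            by_cases hdy : d = (y, x)
            · exact Or.inl hdy
            · exact Or.inr ⟨hdM, fun h => (h.elim hdy hdrest)⟩
          · rintro (rfl | ⟨hdM, hd⟩)
            · refine ⟨hsub' hyxM, ?_⟩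
              rintro (h | h)
              · exact hyxrest h
              · exact hyxl h
            · push Not at hd
              refine ⟨hsub' hdM, ?_⟩
              rintro (h | h)
              · exact hd.2 h
              · exact hfreshM d h hdM
        have hyxP : (y, x) ∉ M \ ((y, x) :: rest).toFinset := by
          simp [Finset.mem_sdiff]
        -- min/max bookkeeping
        have hmn' : ((insert s (M' \ (rest ++ l).toFinset)).image Prod.snd).min =
            ((min mn x : Int) : WithTop Int) := by
          rw [hP', Finset.insert_comm, Finset.image_insert, Finset.min_insert, hmn]
          rw [min_comm]
          rfl
        have hmx' : ((insert s (M' \ (rest ++ l).toFinset)).image Prod.snd).max =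
            ((max mx x : Int) : WithBot Int) := by
          rw [hP', Finset.insert_comm, Finset.image_insert, Finset.max_insert, hmx]
          rw [max_comm]
          rfl
        have hfuel' : land.length * (land.getD 0 []).length + 1 ≤
            fuel + (M' \ (rest ++ l).toFinset).card := by
          rw [hP', Finset.card_insert_of_notMem hyxP]
          simp only [List.toFinset_cons] at hfuel ⊢
          omega
        obtain ⟨vis'', M'', mn'', mx'', hrun, hw2, hc2, hs2, hm2, hx2⟩ :=
          ih vis' (rest ++ l) M' (size + ((rest ++ l).length - rest.length))
            (min mn x) (max mx x) hI' hsz' hmn' hmx' hfuel'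
        exact ⟨vis'', M'', mn'', mx'', by rw [hstep]; exact hrun, hw2, hc2, hs2, hm2, hx2⟩


/- ===== connectivity of oil cells (independent of any visited matrix) ===== -/

def EP0 (land : List (List Int)) (c d : Int × Int) : Prop :=
  AdjP c d ∧ OilP land d

def Conn (land : List (List Int)) (c d : Int × Int) : Prop :=
  OilP land c ∧ Relation.ReflTransGen (EP0 land) c d

lemma conn_refl {land : List (List Int)} {c : Int × Int} (h : OilP land c) :
    Conn land c c := ⟨h, Relation.ReflTransGen.refl⟩

lemma conn_oil {land : List (List Int)} {c d : Int × Int} (h : Conn land c d) :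
    OilP land d := by
  obtain ⟨hc, hchain⟩ := h
  induction hchain with
  | refl => exact hc
  | tail _ h2 _ => exact h2.2

lemma adj_symm {c d : Int × Int} (h : AdjP c d) : AdjP d c := by
  obtain ⟨c1, c2⟩ := c; obtain ⟨d1, d2⟩ := d
  simp only [AdjP] at h ⊢
  omega

lemma conn_symm {land : List (List Int)} {c d : Int × Int} (h : Conn land c d) :
    Conn land d c := by
  obtain ⟨hc, hchain⟩ := h
  refine ⟨conn_oil ⟨hc, hchain⟩, ?_⟩
  induction hchain with
  | refl => exact Relation.ReflTransGen.refl
  | @tail b e h1 h2 ih =>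
      have hb : OilP land b := conn_oil ⟨hc, h1⟩
      exact Relation.ReflTransGen.head ⟨adj_symm h2.1, hb⟩ ih

lemma conn_trans {land : List (List Int)} {c d e : Int × Int}
    (h1 : Conn land c d) (h2 : Conn land d e) : Conn land c e :=
  ⟨h1.1, h1.2.trans h2.2⟩

noncomputable def compF (land : List (List Int)) (c : Int × Int) : Finset (Int × Int) :=
  letI : DecidablePred (fun d => Conn land c d) := Classical.decPred _
  (gridF land.length (land.getD 0 []).length).filter (fun d => Conn land c d)

lemma mem_compF {land : List (List Int)} {c d : Int × Int} :
    d ∈ compF land c ↔ Conn land c d := by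
  rw [compF]
  rw [@Finset.mem_filter _ _ (Classical.decPred _) _ _]
  constructor
  · exact fun h => h.2
  · exact fun h => ⟨mem_gridF.mpr (conn_oil h).1, h⟩

/- `vis` marks exactly the set `V` -/
def CharV (vis : List (List Bool)) (n m : Nat) (V : Finset (Int × Int)) : Prop :=
  ∀ c : Int × Int, InGrid n m c → (vget vis c.1 c.2 = true ↔ c ∈ V)

/- `V` is a union of complete oil components -/
def ClosedV (land : List (List Int)) (V : Finset (Int × Int)) : Prop :=
  ∀ e ∈ V, OilP land e ∧ ∀ d, Conn land e d → d ∈ V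

lemma unvisited_of_not_mem {land : List (List Int)} {vis : List (List Bool)}
    {V : Finset (Int × Int)} {c : Int × Int}
    (hch : CharV vis land.length (land.getD 0 []).length V)
    (hg : InGrid land.length (land.getD 0 []).length c) (hnV : c ∉ V) :
    vget vis c.1 c.2 = false := by
  cases hvv : vget vis c.1 c.2
  · rfl
  · exact absurd ((hch c hg).mp hvv) hnV

/- flooding from a fresh seed is not influenced by previously-flooded complete components -/
lemma reach_eq_conn {land : List (List Int)} {vis : List (List Bool)}
    {V : Finset (Int × Int)} {s : Int × Int}
    (hch : CharV vis land.length (land.getD 0 []).length V)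
    (hcl : ClosedV land V) (hs : OilP land s) (hsV : s ∉ V) :
    {c | ReachP land vis s c} = {c | Conn land s c} := by
  ext c
  simp only [Set.mem_setOf_eq]
  constructor
  · intro h
    refine ⟨hs, ?_⟩
    exact Relation.ReflTransGen.mono (fun a b hab => ⟨hab.1, hab.2.1⟩) h
  · rintro ⟨_, hchain⟩
    suffices h : ReachP land vis s c ∧ c ∉ V from h.1
    induction hchain with
    | refl => exact ⟨Relation.ReflTransGen.refl, hsV⟩
    | @tail b d h1 h2 ih =>
        obtain ⟨hreach, hbV⟩ := ih
        have hdV : d ∉ V := by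
          intro hdV
          have hconn_sd : Conn land s d := ⟨hs, h1.trans (Relation.ReflTransGen.single h2)⟩
          exact hsV ((hcl d hdV).2 s (conn_symm hconn_sd))
        have hdvis : vget vis d.1 d.2 = false :=
          unvisited_of_not_mem hch h2.2.1 hdV
        exact ⟨hreach.tail ⟨h2.1, h2.2, hdvis⟩, hdV⟩

/- ===== the canonical component machine both programs are reduced to ===== -/

noncomputable def canonStep (land : List (List Int))
    (st : Finset (Int × Int) × List (Int × Int)) (c : Int × Int) :
    Finset (Int × Int) × List (Int × Int) :=
  letI := Classical.propDecidable (OilP land c ∧ c ∉ st.1)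
  if OilP land c ∧ c ∉ st.1 then (st.1 ∪ compF land c, st.2 ++ [c]) else st

structure CanonInv (land : List (List Int))
    (st : Finset (Int × Int) × List (Int × Int)) : Prop where
  closed : ClosedV land st.1
  seedsOil : ∀ s ∈ st.2, OilP land s
  cover : ∀ c, c ∈ st.1 ↔ ∃ s ∈ st.2, Conn land s c
  distinct : st.2.Pairwise (fun s t => ¬ Conn land s t)

lemma canonInv_init (land : List (List Int)) :
    CanonInv land ((∅ : Finset (Int × Int)), ([] : List (Int × Int))) := by
  refine ⟨?_, ?_, ?_, ?_⟩
  · intro e he; simp at he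
  · intro s hs; exact absurd hs List.not_mem_nil
  · intro c; simp
  · exact List.Pairwise.nil

lemma seed_mem_V {land : List (List Int)} {st : Finset (Int × Int) × List (Int × Int)}
    (h : CanonInv land st) {s : Int × Int} (hs : s ∈ st.2) : s ∈ st.1 :=
  (h.cover s).mpr ⟨s, hs, conn_refl (h.seedsOil s hs)⟩

lemma canonStep_inv {land : List (List Int)} {st : Finset (Int × Int) × List (Int × Int)}
    (h : CanonInv land st) (c : Int × Int) : CanonInv land (canonStep land st c) := by
  rw [canonStep]
  split
  · rename_i hg
    obtain ⟨hoil, hnV⟩ := hg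
    refine ⟨?_, ?_, ?_, ?_⟩
    · intro e he
      rcases Finset.mem_union.mp he with h1 | h1
      · obtain ⟨h2, h3⟩ := h.closed e h1
        exact ⟨h2, fun d hd => Finset.mem_union_left _ (h3 d hd)⟩
      · have hce : Conn land c e := mem_compF.mp h1
        refine ⟨conn_oil hce, fun d hd => Finset.mem_union_right _ ?_⟩
        exact mem_compF.mpr (conn_trans hce hd)
    · intro s hs
      rcases List.mem_append.mp hs with h1 | h1
      · exact h.seedsOil s h1
      · simp at h1; subst h1; exact hoil
    · intro e
      rw [Finset.mem_union, h.cover e]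
      constructor
      · rintro (⟨s, hs, hconn⟩ | h1)
        · exact ⟨s, List.mem_append.mpr (Or.inl hs), hconn⟩
        · exact ⟨c, List.mem_append.mpr (Or.inr (List.mem_singleton.mpr rfl)),
            mem_compF.mp h1⟩
      · rintro ⟨s, hs, hconn⟩
        rcases List.mem_append.mp hs with h1 | h1
        · exact Or.inl ⟨s, h1, hconn⟩
        · simp at h1; subst h1; exact Or.inr (mem_compF.mpr hconn)
    · rw [List.pairwise_append]
      refine ⟨h.distinct, List.pairwise_singleton _ _, ?_⟩
      intro s hs c' hc'
      rw [List.mem_singleton] at hc'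
      intro hconn
      exact hnV ((h.closed s (seed_mem_V h hs)).2 c (hc' ▸ hconn))
  · exact h

/- the triple (size, min column, max column) of a component -/
noncomputable def tripleOf (K : Finset (Int × Int)) : Int × Int × Int :=
  ((K.card : Int), WithTop.untopD 0 (K.image Prod.snd).min,
    WithBot.unbotD 0 (K.image Prod.snd).max)

/- 'result[c] += size for c in range(lo, hi+1)' — the update both programs share -/
def addComp (b : List Int) (t : Int × Int × Int) : List Int :=
  (PySem.List.pyRange t.2.1 (t.2.2 + 1) 1).foldl
    (fun res k => res.set k.toNat (res.getD k.toNat 0 + t.1)) b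

def zerosM (land : List (List Int)) : List Int :=
  List.replicate (land.getD 0 []).length (0 : Int)

/- ===== A's scan simulates the canonical machine ===== -/

def innerA (land : List (List Int)) (j : Int) (st : List (List Bool) × List Int)
    (i : Int) : List (List Bool) × List Int :=
  if lget land i j != 0 && !(vget st.1 i j) then calSize land i j st.1 st.2 else st

def RelA (land : List (List Int)) (st : List (List Bool) × List Int)
    (cst : Finset (Int × Int) × List (Int × Int)) : Prop :=
  Wf st.1 land.length (land.getD 0 []).length ∧
  CharV st.1 land.length (land.getD 0 []).length cst.1 ∧
  st.2 = (cst.2.map (fun s => tripleOf (compF land s))).foldl addComp (zerosM land)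

lemma mchar_trivial (land : List (List Int)) (vis : List (List Bool)) :
    Mchar vis land.length (land.getD 0 []).length vis (∅ : Finset (Int × Int)) := by
  intro c _
  simp

/- flooding a fresh oil seed c computes exactly tripleOf (compF land c) and marks compF land c -/
lemma calSize_char {land : List (List Int)} {vis : List (List Bool)}
    {V : Finset (Int × Int)} {i j : Int}
    (hwf : Wf vis land.length (land.getD 0 []).length)
    (hch : CharV vis land.length (land.getD 0 []).length V)
    (hcl : ClosedV land V)
    (hoil : OilP land (i, j)) (hnV : (i, j) ∉ V) (result : List Int) :
    Wf (calSize land i j vis result).1 land.length (land.getD 0 []).length ∧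
    CharV (calSize land i j vis result).1 land.length (land.getD 0 []).length
      (V ∪ compF land (i, j)) ∧
    (calSize land i j vis result).2 = addComp result (tripleOf (compF land (i, j))) := by
  have hv : vget vis i j = false := unvisited_of_not_mem hch hoil.1 hnV
  have hI : FloodInv land vis (i, j) (vset vis i j) [(i, j)] {(i, j)} := by
    refine ⟨wf_vset hwf i j, ?_, List.nodup_singleton _, ?_, ?_, ?_,
      Finset.mem_singleton_self _, ?_⟩
    · have := mchar_vset (c := (i, j)) hwf (mchar_trivial land vis) hoil.1
      simpa using this
    · intro c hc
      rw [List.mem_singleton] at hc; subst hc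
      exact Finset.mem_singleton_self _
    · intro c hc
      rw [Finset.mem_singleton] at hc; subst hc
      exact ⟨hoil, hv⟩
    · intro c hc
      rw [Finset.mem_singleton] at hc; subst hc
      exact Relation.ReflTransGen.refl
    · intro c hc hcq
      rw [Finset.mem_singleton] at hc; subst hc
      exact absurd (List.mem_singleton.mpr rfl) hcq
  have hPempty : ({(i, j)} : Finset (Int × Int)) \ [(i, j)].toFinset = ∅ := by simp
  have hins : insert (i, j) (({(i, j)} : Finset (Int × Int)) \ [(i, j)].toFinset) =
      {(i, j)} := by rw [hPempty]; rfl
  have hmn : ((insert (i, j) (({(i, j)} : Finset (Int × Int)) \ [(i, j)].toFinset)).image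
      Prod.snd).min = ((j : Int) : WithTop Int) := by rw [hins]; simp
  have hmx : ((insert (i, j) (({(i, j)} : Finset (Int × Int)) \ [(i, j)].toFinset)).image
      Prod.snd).max = ((j : Int) : WithBot Int) := by rw [hins]; simp
  obtain ⟨vis', M', mn', mx', hrun, hwf', hch', hset, hm, hx⟩ :=
    loopA_spec land vis (i, j) (land.length * (land.getD 0 []).length + 1)
      (vset vis i j) [(i, j)] {(i, j)} 1 j j hI (by simp) hmn hmx (by omega)
  have hMcomp : M' = compF land (i, j) := by
    apply Finset.coe_inj.mp
    rw [hset, reach_eq_conn hch hcl hoil hnV]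
    ext d
    simp [mem_compF]
  subst hMcomp
  have hcal1 : (calSize land i j vis result).1 = vis' := by
    rw [calSize, hrun]
  have hcal2 : (calSize land i j vis result).2 =
      addComp result ((((compF land (i, j)).card : Int)), mn', mx') := by
    rw [calSize, hrun]
    rfl
  refine ⟨hcal1 ▸ hwf', ?_, ?_⟩
  · rw [hcal1]
    intro e he
    rw [hch' e he, Finset.mem_union]
    constructor
    · rintro (h1 | h1)
      · exact Or.inl ((hch e he).mp h1)
      · exact Or.inr h1
    · rintro (h1 | h1)
      · exact Or.inl ((hch e he).mpr h1)
      · exact Or.inr h1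
  · rw [hcal2, tripleOf]
    have hmn'' : WithTop.untopD 0 (((compF land (i, j)).image Prod.snd).min) = mn' := by
      rw [hm]; rfl
    have hmx'' : WithBot.unbotD 0 (((compF land (i, j)).image Prod.snd).max) = mx' := by
      rw [hx]; rfl
    rw [hmn'', hmx'']

lemma A_step {land : List (List Int)} {i j : Int}
    {st : List (List Bool) × List Int} {cst : Finset (Int × Int) × List (Int × Int)}
    (hi : 0 ≤ i ∧ i < (land.length : Int))
    (hj : 0 ≤ j ∧ j < ((land.getD 0 []).length : Int))
    (hrel : RelA land st cst) (hinv : CanonInv land cst) :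
    RelA land (innerA land j st i) (canonStep land cst (i, j)) := by
  obtain ⟨hwf, hch, hres⟩ := hrel
  have hgrid : InGrid land.length (land.getD 0 []).length (i, j) :=
    ⟨hi.1, hi.2, hj.1, hj.2⟩
  by_cases hgb : (lget land i j != 0 && !(vget st.1 i j)) = true
  · have hg := hgb
    rw [Bool.and_eq_true] at hg
    have hlg : lget land i j ≠ 0 := bne_iff_ne.mp hg.1
    have hv : vget st.1 i j = false := by simpa using hg.2
    have hoil : OilP land (i, j) := ⟨hgrid, hlg⟩
    have hnV : (i, j) ∉ cst.1 := by
      intro hmem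
      have h2 := (hch (i, j) hgrid).mpr hmem
      rw [hv] at h2
      exact absurd h2 (by decide)
    obtain ⟨hwf', hch', hres'⟩ := calSize_char hwf hch hinv.closed hoil hnV st.2
    have hstep : innerA land j st i = calSize land i j st.1 st.2 := by
      rw [innerA, if_pos hgb]
    have hcstep : canonStep land cst (i, j) =
        (cst.1 ∪ compF land (i, j), cst.2 ++ [(i, j)]) := by
      rw [canonStep, if_pos ⟨hoil, hnV⟩]
    rw [hstep, hcstep]
    refine ⟨hwf', hch', ?_⟩
    rw [hres', hres, List.map_append, List.foldl_append]
    rfl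
  · have hstep : innerA land j st i = st := by rw [innerA, if_neg hgb]
    have hcstep : canonStep land cst (i, j) = cst := by
      rw [canonStep, if_neg ?_]
      intro hcond
      obtain ⟨hoil, hnV⟩ := hcond
      have hv : vget st.1 i j = false := unvisited_of_not_mem hch hgrid hnV
      apply hgb
      simp [bne_iff_ne, hoil.2, hv]
    rw [hstep, hcstep]
    exact ⟨hwf, hch, hres⟩

lemma A_cells {land : List (List Int)} :
    ∀ (cs : List (Int × Int)) {st : List (List Bool) × List Int}
      {cst : Finset (Int × Int) × List (Int × Int)},
    (∀ c ∈ cs, InGrid land.length (land.getD 0 []).length c) →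
    RelA land st cst → CanonInv land cst →
    RelA land (cs.foldl (fun s c => innerA land c.2 s c.1) st)
      (cs.foldl (canonStep land) cst) ∧
    CanonInv land (cs.foldl (canonStep land) cst) := by
  intro cs
  induction cs with
  | nil => exact fun _ h hinv => ⟨h, hinv⟩
  | cons c cs ih =>
      intro st cst hcells hrel hinv
      have hc := hcells c List.mem_cons_self
      have hstep := A_step (i := c.1) (j := c.2) ⟨hc.1, hc.2.1⟩ ⟨hc.2.2.1, hc.2.2.2⟩
        hrel hinv
      have hinv' := canonStep_inv hinv c
      rw [List.foldl_cons, List.foldl_cons]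
      exact ih (fun d hd => hcells d (List.mem_cons_of_mem _ hd))
        (by simpa using hstep) (by simpa using hinv')

/- the cells in the order A (and B) scans them: column by column -/
def colCells (land : List (List Int)) : List (Int × Int) :=
  (PySem.List.pyRange 0 (((land.getD 0 []).length : Nat) : Int) 1).flatMap
    (fun j => (PySem.List.pyRange 0 ((land.length : Nat) : Int) 1).map (fun i => (i, j)))

lemma colCells_grid {land : List (List Int)} :
    ∀ c ∈ colCells land, InGrid land.length (land.getD 0 []).length c := by
  intro c hc
  rw [colCells, List.mem_flatMap] at hc
  obtain ⟨j, hj, hc⟩ := hc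
  rw [List.mem_map] at hc
  obtain ⟨i, hi, rfl⟩ := hc
  have hj' := PySem.List.mem_pyRange_one.mp hj
  have hi' := PySem.List.mem_pyRange_one.mp hi
  exact ⟨hi'.1, hi'.2, hj'.1, hj'.2⟩

noncomputable def canonFin (land : List (List Int)) :
    Finset (Int × Int) × List (Int × Int) :=
  (colCells land).foldl (canonStep land) (∅, [])

lemma vget_init (n m : Nat) (y x : Int) :
    vget (List.replicate n (List.replicate m false)) y x = false := by
  rw [vget_eq, List.getElem?_replicate]
  by_cases h : y.toNat < n
  · rw [if_pos h]
    show ((List.replicate m false)[x.toNat]?).getD false = false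
    rw [List.getElem?_replicate]
    by_cases h2 : x.toNat < m
    · rw [if_pos h2]; rfl
    · rw [if_neg h2]; rfl
  · rw [if_neg h]; rfl

lemma wf_init (land : List (List Int)) :
    Wf (List.replicate land.length (List.replicate (land.getD 0 []).length false))
      land.length (land.getD 0 []).length := by
  refine ⟨List.length_replicate, ?_⟩
  intro r hr
  rw [List.eq_of_mem_replicate hr]
  exact List.length_replicate

lemma relA_init (land : List (List Int)) :
    RelA land
      (List.replicate land.length (List.replicate (land.getD 0 []).length false),
        zerosM land)
      ((∅ : Finset (Int × Int)), ([] : List (Int × Int))) := by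
  refine ⟨wf_init land, ?_, rfl⟩
  intro c _
  rw [vget_init]
  simp

/- A's full scan: result = the canonical component triples folded into the zero row -/
lemma A_char (land : List (List Int)) :
    solution land =
      (PySem.List.max? (((canonFin land).2.map (fun s => tripleOf (compF land s))).foldl
        addComp (zerosM land)) (fun y => y)).getD 0 := by
  have hfold : (PySem.List.pyRange 0 (((land.getD 0 []).length : Nat) : Int) 1).foldl
      (fun st j => (PySem.List.pyRange 0 ((land.length : Nat) : Int) 1).foldl
        (innerA land j) st)
      (List.replicate land.length (List.replicate (land.getD 0 []).length false),
        zerosM land) =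
      (colCells land).foldl (fun s c => innerA land c.2 s c.1)
        (List.replicate land.length (List.replicate (land.getD 0 []).length false),
          zerosM land) := by
    rw [colCells]
    generalize (PySem.List.pyRange 0 (((land.getD 0 []).length : Nat) : Int) 1) = js
    generalize (List.replicate land.length (List.replicate (land.getD 0 []).length false),
      zerosM land) = st0
    induction js generalizing st0 with
    | nil => rfl
    | cons j js ih =>
        rw [List.foldl_cons, List.flatMap_cons, List.foldl_append, ih]
        congr 1
        generalize (PySem.List.pyRange 0 ((land.length : Nat) : Int) 1) = is
        induction is generalizing st0 with
        | nil => rfl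
        | cons i is ih2 => rw [List.foldl_cons, List.map_cons, List.foldl_cons, ih2]
  have hrel := (A_cells (colCells land)
    (st := (List.replicate land.length (List.replicate (land.getD 0 []).length false),
      zerosM land))
    (cst := ((∅ : Finset (Int × Int)), ([] : List (Int × Int))))
    colCells_grid (relA_init land) (canonInv_init land)).1
  obtain ⟨_, _, hres⟩ := hrel
  show (PySem.List.max? ((PySem.List.pyRange 0 (((land.getD 0 []).length : Nat) : Int) 1).foldl
      (fun st j => (PySem.List.pyRange 0 ((land.length : Nat) : Int) 1).foldl
        (innerA land j) st)
      (List.replicate land.length (List.replicate (land.getD 0 []).length false),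
        zerosM land)).2 (fun y => y)).getD 0 = _
  rw [hfold]
  rw [show (colCells land).foldl (canonStep land) (∅, []) = canonFin land from rfl] at hres
  rw [hres]

/- ===== B: union-find over column-major cell indices ===== -/

def encI (land : List (List Int)) (c : Int × Int) : Int :=
  c.2 * (land.length : Int) + c.1

/- one union edge: an oil cell and its right or below oil neighbour -/
def EdgeCell (land : List (List Int)) (c d : Int × Int) : Prop :=
  OilP land c ∧ OilP land d ∧ (d = (c.1, c.2 + 1) ∨ d = (c.1 + 1, c.2))

def ER (land : List (List Int)) (a b : Int) : Prop :=
  ∃ c d, EdgeCell land c d ∧ a = encI land c ∧ b = encI land d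

lemma encI_bounds {land : List (List Int)} {c : Int × Int}
    (h : InGrid land.length (land.getD 0 []).length c) :
    0 ≤ encI land c ∧ encI land c < (land.length : Int) * ((land.getD 0 []).length : Int) := by
  obtain ⟨h1, h2, h3, h4⟩ := h
  constructor
  · have := mul_nonneg h3 (by positivity : (0 : Int) ≤ (land.length : Int))
    rw [encI]; omega
  · rw [encI]
    have hle : c.2 ≤ ((land.getD 0 []).length : Int) - 1 := by omega
    have := mul_le_mul_of_nonneg_right hle (by positivity : (0 : Int) ≤ (land.length : Int))
    nlinarith

lemma encI_inj {land : List (List Int)} {c d : Int × Int}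
    (hc : InGrid land.length (land.getD 0 []).length c)
    (hd : InGrid land.length (land.getD 0 []).length d)
    (h : encI land c = encI land d) : c = d := by
  obtain ⟨hc1, hc2, hc3, hc4⟩ := hc
  obtain ⟨hd1, hd2, hd3, hd4⟩ := hd
  rw [encI, encI] at h
  have hn : (0 : Int) < (land.length : Int) := by omega
  have h2 : c.2 = d.2 := by
    have e1 : (c.1 + c.2 * (land.length : Int)) / (land.length : Int) = c.2 := by
      rw [Int.add_mul_ediv_right _ _ (by omega : (land.length : Int) ≠ 0),
        Int.ediv_eq_zero_of_lt hc1 hc2]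
      omega
    have e2 : (d.1 + d.2 * (land.length : Int)) / (land.length : Int) = d.2 := by
      rw [Int.add_mul_ediv_right _ _ (by omega : (land.length : Int) ≠ 0),
        Int.ediv_eq_zero_of_lt hd1 hd2]
      omega
    rw [← e1, ← e2]
    congr 1
    omega
  have h1 : c.1 = d.1 := by nlinarith [h2]
  exact Prod.ext h1 h2

/- parent-array invariants: entries point weakly downwards -/
def PDec (p : List Int) : Prop :=
  ∀ k : Nat, k < p.length → 0 ≤ p.getD k 0 ∧ p.getD k 0 ≤ (k : Int)

lemma getD_set_self {p : List Int} {k : Nat} {v : Int} (h : k < p.length) :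
    (p.set k v).getD k 0 = v := by
  rw [List.getD, List.getElem?_set_self (by simpa using h)]
  rfl

lemma getD_set_ne {p : List Int} {k k' : Nat} (v : Int) (h : k ≠ k') :
    (p.set k v).getD k' 0 = p.getD k' 0 := by
  rw [List.getD, List.getElem?_set_ne h, ← List.getD]

lemma pdec_set {p : List Int} (hdec : PDec p) {R : Nat} {r : Int}
    (h0 : 0 ≤ r) (hr : r ≤ (R : Int)) : PDec (p.set R r) := by
  intro k hk
  rw [List.length_set] at hk
  by_cases hkR : R = k
  · subst hkR
    rw [getD_set_self hk]
    exact ⟨h0, hr⟩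
  · rw [getD_set_ne _ hkR]
    exact hdec k hk

lemma findRoot_succ (p : List Int) (N : Nat) (x : Int) :
    findRoot p (N + 1) x =
      if p.getD x.toNat 0 == x then x else findRoot p N (p.getD x.toNat 0) := rfl

lemma findRoot_of_root {p : List Int} {x : Int} (h : p.getD x.toNat 0 = x) :
    ∀ N, findRoot p N x = x := by
  intro N
  cases N with
  | zero => rfl
  | succ N => rw [findRoot_succ, if_pos (by rw [h]; exact beq_self_eq_true x)]

lemma findRoot_spec {p : List Int} (hdec : PDec p) :
    ∀ (N : Nat) (x : Int), 0 ≤ x → x.toNat < p.length → x.toNat < N →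
      (0 ≤ findRoot p N x ∧ findRoot p N x ≤ x ∧
        p.getD (findRoot p N x).toNat 0 = findRoot p N x) := by
  intro N
  induction N with
  | zero => intro x _ _ h; omega
  | succ N ih =>
      intro x hx hlen hN
      rw [findRoot_succ]
      by_cases hroot : (p.getD x.toNat 0 == x) = true
      · rw [if_pos hroot]
        exact ⟨hx, le_refl x, by simpa using hroot⟩
      · rw [if_neg hroot]
        obtain ⟨hy0, hyx⟩ := hdec x.toNat hlen
        have hyne : p.getD x.toNat 0 ≠ x := by simpa using hroot
        have hylt : p.getD x.toNat 0 < x := lt_of_le_of_ne (by omega) hyne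
        obtain ⟨h1, h2, h3⟩ := ih (p.getD x.toNat 0) hy0 (by omega) (by omega)
        exact ⟨h1, by omega, h3⟩

lemma eqv_findRoot {land : List (List Int)} {p : List Int} (hdec : PDec p)
    (heqv : ∀ k : Nat, k < p.length → Relation.EqvGen (ER land) (k : Int) (p.getD k 0)) :
    ∀ (N : Nat) (x : Int), 0 ≤ x → x.toNat < p.length → x.toNat < N →
      Relation.EqvGen (ER land) x (findRoot p N x) := by
  intro N
  induction N with
  | zero => intro x _ _ h; omega
  | succ N ih =>
      intro x hx hlen hN
      rw [findRoot_succ]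
      by_cases hroot : (p.getD x.toNat 0 == x) = true
      · rw [if_pos hroot]
        exact Relation.EqvGen.refl x
      · rw [if_neg hroot]
        obtain ⟨hy0, hyx⟩ := hdec x.toNat hlen
        have hyne : p.getD x.toNat 0 ≠ x := by simpa using hroot
        have hylt : p.getD x.toNat 0 < x := lt_of_le_of_ne (by omega) hyne
        have hx' : Relation.EqvGen (ER land) x (p.getD x.toNat 0) := by
          have := heqv x.toNat hlen
          rwa [Int.toNat_of_nonneg hx] at this
        exact Relation.EqvGen.trans _ _ _ hx'
          (ih (p.getD x.toNat 0) hy0 (by omega) (by omega))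

/- linking root R below root r (r < R) renames root R to r and changes nothing else -/
lemma findRoot_set {p : List Int} (hdec : PDec p) {R r : Int}
    (h0r : 0 ≤ r) (hrR : r < R) (hRlen : R.toNat < p.length)
    (hRroot : p.getD R.toNat 0 = R) (hrroot : p.getD r.toNat 0 = r) :
    ∀ (N : Nat) (x : Int), 0 ≤ x → x.toNat < p.length → x.toNat < N →
      findRoot (p.set R.toNat r) N x =
        if findRoot p N x = R then r else findRoot p N x := by
  have h0R : (0 : Int) ≤ R := by omega
  have hne : r.toNat ≠ R.toNat := by omega
  intro N
  induction N with
  | zero => intro x _ _ h; omega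
  | succ N ih =>
      intro x hx hlen hN
      by_cases hxR : x.toNat = R.toNat
      · have hxR' : x = R := by omega
        rw [hxR']
        have hsetR : (p.set R.toNat r).getD R.toNat 0 = r := getD_set_self hRlen
        rw [findRoot_succ, hsetR, if_neg (by simp; omega)]
        have hrootr : (p.set R.toNat r).getD r.toNat 0 = r := by
          rw [getD_set_ne _ (fun h => hne (h.symm)), hrroot]
        rw [findRoot_of_root hrootr]
        rw [findRoot_of_root hRroot, if_pos rfl]
      · rw [findRoot_succ, findRoot_succ, getD_set_ne _ (fun h => hxR (h.symm))]
        by_cases hroot : (p.getD x.toNat 0 == x) = true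
        · rw [if_pos hroot, if_pos hroot, if_neg (by omega)]
        · rw [if_neg hroot, if_neg hroot]
          obtain ⟨hy0, hyx⟩ := hdec x.toNat hlen
          have hyne : p.getD x.toNat 0 ≠ x := by simpa using hroot
          have hylt : p.getD x.toNat 0 < x := lt_of_le_of_ne (by omega) hyne
          exact ih (p.getD x.toNat 0) hy0 (by omega) (by omega)

def rootp (land : List (List Int)) (p : List Int) (x : Int) : Int :=
  findRoot p (land.length * (land.getD 0 []).length) x

structure UInv (land : List (List Int)) (p : List Int) : Prop where
  len : p.length = land.length * (land.getD 0 []).length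
  dec : PDec p
  eqv : ∀ k : Nat, k < p.length → Relation.EqvGen (ER land) (k : Int) (p.getD k 0)

lemma rootp_spec {land : List (List Int)} {p : List Int} (hU : UInv land p)
    {x : Int} (hx : 0 ≤ x) (hlen : x.toNat < p.length) :
    0 ≤ rootp land p x ∧ rootp land p x ≤ x ∧
      p.getD (rootp land p x).toNat 0 = rootp land p x :=
  findRoot_spec hU.dec _ x hx hlen (hU.len ▸ hlen)

lemma rootp_eqv {land : List (List Int)} {p : List Int} (hU : UInv land p)
    {x : Int} (hx : 0 ≤ x) (hlen : x.toNat < p.length) :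
    Relation.EqvGen (ER land) x (rootp land p x) :=
  eqv_findRoot hU.dec (fun k hk => hU.eqv k hk) _ x hx hlen (hU.len ▸ hlen)

/- one union call: invariants survive, equal roots stay equal, a and b get merged -/
lemma unionDSU_spec {land : List (List Int)} {p : List Int} {a b : Int}
    (hU : UInv land p) (ha0 : 0 ≤ a) (halen : a.toNat < p.length)
    (hb0 : 0 ≤ b) (hblen : b.toNat < p.length)
    (hE : Relation.EqvGen (ER land) a b) :
    UInv land (unionDSU p (land.length * (land.getD 0 []).length) a b) ∧
    (unionDSU p (land.length * (land.getD 0 []).length) a b).length = p.length ∧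
    (∀ x y : Int, 0 ≤ x → x.toNat < p.length → 0 ≤ y → y.toNat < p.length →
      rootp land p x = rootp land p y →
      rootp land (unionDSU p (land.length * (land.getD 0 []).length) a b) x =
        rootp land (unionDSU p (land.length * (land.getD 0 []).length) a b) y) ∧
    rootp land (unionDSU p (land.length * (land.getD 0 []).length) a b) a =
      rootp land (unionDSU p (land.length * (land.getD 0 []).length) a b) b := by
  obtain ⟨hra0, hraa, hraroot⟩ := rootp_spec hU ha0 halen
  obtain ⟨hrb0, hrbb, hrbroot⟩ := rootp_spec hU hb0 hblen
  have hralen : (rootp land p a).toNat < p.length := by omega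
  have hrblen : (rootp land p b).toNat < p.length := by omega
  have hEab : Relation.EqvGen (ER land) (rootp land p a) (rootp land p b) :=
    Relation.EqvGen.trans _ _ _
      (Relation.EqvGen.symm _ _ (rootp_eqv hU ha0 halen))
      (Relation.EqvGen.trans _ _ _ hE (rootp_eqv hU hb0 hblen))
  have hmain : ∀ (R r : Int), R = rootp land p a ∨ R = rootp land p b →
      r = rootp land p a ∨ r = rootp land p b → r < R →
      p.getD R.toNat 0 = R → p.getD r.toNat 0 = r → 0 ≤ r →
      UInv land (p.set R.toNat r) ∧ (p.set R.toNat r).length = p.length ∧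
      (∀ x : Int, 0 ≤ x → x.toNat < p.length →
        rootp land (p.set R.toNat r) x =
          if rootp land p x = R then r else rootp land p x) := by
    intro R r hRor hror hlt hRroot hrroot h0r
    have hRlen : R.toNat < p.length := by
      rcases hRor with h | h <;> (subst h; assumption)
    have hERr : Relation.EqvGen (ER land) R r := by
      rcases hRor with h | h <;> rcases hror with h' | h' <;> subst h <;> subst h'
      · exact Relation.EqvGen.refl _
      · exact hEab
      · exact Relation.EqvGen.symm _ _ hEab
      · exact Relation.EqvGen.refl _
    refine ⟨⟨by rw [List.length_set]; exact hU.len, pdec_set hU.dec h0r (by omega), ?_⟩,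
      by rw [List.length_set], ?_⟩
    · intro k hk
      rw [List.length_set] at hk
      by_cases hkR : R.toNat = k
      · subst hkR
        rw [getD_set_self hRlen]
        have : ((R.toNat : Nat) : Int) = R := by omega
        rw [this]
        exact hERr
      · rw [getD_set_ne _ hkR]
        exact hU.eqv k hk
    · intro x hx hxlen
      exact findRoot_set hU.dec h0r hlt hRlen hRroot hrroot _ x hx hxlen (hU.len ▸ hxlen)
  have hun : unionDSU p (land.length * (land.getD 0 []).length) a b =
      if rootp land p a < rootp land p b then p.set (rootp land p b).toNat (rootp land p a)
      else if rootp land p b < rootp land p a then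
        p.set (rootp land p a).toNat (rootp land p b)
      else p := rfl
  rw [hun]
  by_cases hlt : rootp land p a < rootp land p b
  · rw [if_pos hlt]
    obtain ⟨hU', hlen', htrans⟩ := hmain (rootp land p b) (rootp land p a)
      (Or.inr rfl) (Or.inl rfl) hlt hrbroot hraroot hra0
    refine ⟨hU', hlen', ?_, ?_⟩
    · intro x y hx hxl hy hyl hxy
      rw [htrans x hx hxl, htrans y hy hyl, hxy]
    · rw [htrans a ha0 halen, htrans b hb0 hblen, if_pos rfl]
      by_cases h : rootp land p a = rootp land p b
      · rw [if_pos h]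
      · rw [if_neg h]
  · rw [if_neg hlt]
    by_cases hlt2 : rootp land p b < rootp land p a
    · rw [if_pos hlt2]
      obtain ⟨hU', hlen', htrans⟩ := hmain (rootp land p a) (rootp land p b)
        (Or.inl rfl) (Or.inr rfl) hlt2 hraroot hrbroot hrb0
      refine ⟨hU', hlen', ?_, ?_⟩
      · intro x y hx hxl hy hyl hxy
        rw [htrans x hx hxl, htrans y hy hyl, hxy]
      · rw [htrans a ha0 halen, htrans b hb0 hblen, if_pos rfl]
        by_cases h : rootp land p b = rootp land p a
        · rw [if_pos h]
        · rw [if_neg h]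
    · rw [if_neg hlt2]
      exact ⟨hU, rfl, fun x y _ _ _ _ h => h, by omega⟩

/- roots computed so far respect the union edges of the processed cells -/
def RespB (land : List (List Int)) (p : List Int) (P : List (Int × Int)) : Prop :=
  ∀ c ∈ P, ∀ d, EdgeCell land c d →
    rootp land p (encI land c) = rootp land p (encI land d)

/- the two guarded unions in the body of B's union pass -/
def bU1 (land : List (List Int)) (j : Int) (p : List Int) (i : Int) : List Int :=
  if decide (j + 1 < ((land.getD 0 []).length : Int)) && (lget land i (j + 1) != 0) then
    unionDSU p (land.length * (land.getD 0 []).length)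
      (j * (land.length : Int) + i) ((j + 1) * (land.length : Int) + i)
  else p

def bU2 (land : List (List Int)) (j : Int) (p : List Int) (i : Int) : List Int :=
  if decide (i + 1 < (land.length : Int)) && (lget land (i + 1) j != 0) then
    unionDSU p (land.length * (land.getD 0 []).length)
      (j * (land.length : Int) + i) (j * (land.length : Int) + i + 1)
  else p

def bUnionStep (land : List (List Int)) (j : Int) (p : List Int) (i : Int) : List Int :=
  if lget land i j != 0 then bU2 land j (bU1 land j p i) i else p

lemma enc_lt_len {land : List (List Int)} {p : List Int} (hlen : p.length =
    land.length * (land.getD 0 []).length) {c : Int × Int}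
    (hg : InGrid land.length (land.getD 0 []).length c) :
    0 ≤ encI land c ∧ (encI land c).toNat < p.length := by
  obtain ⟨h1, h2⟩ := encI_bounds hg
  have : ((land.length * (land.getD 0 []).length : Nat) : Int) =
      (land.length : Int) * ((land.getD 0 []).length : Int) := by push_cast; ring
  refine ⟨h1, ?_⟩
  omega

lemma edge_right_iff {land : List (List Int)} {i j : Int}
    (hg : InGrid land.length (land.getD 0 []).length (i, j))
    (hoil : lget land i j ≠ 0) :
    ((decide (j + 1 < ((land.getD 0 []).length : Int)) &&
      (lget land i (j + 1) != 0)) = true) ↔ EdgeCell land (i, j) (i, j + 1) := by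
  obtain ⟨h1, h2, h3, h4⟩ := hg
  constructor
  · intro h
    rw [Bool.and_eq_true, decide_eq_true_eq] at h
    exact ⟨⟨⟨h1, h2, h3, h4⟩, hoil⟩, ⟨⟨h1, h2, by omega, h.1⟩, bne_iff_ne.mp h.2⟩,
      Or.inl rfl⟩
  · intro ⟨_, hd, _⟩
    rw [Bool.and_eq_true, decide_eq_true_eq]
    exact ⟨hd.1.2.2.2, bne_iff_ne.mpr hd.2⟩

lemma edge_below_iff {land : List (List Int)} {i j : Int}
    (hg : InGrid land.length (land.getD 0 []).length (i, j))
    (hoil : lget land i j ≠ 0) :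
    ((decide (i + 1 < (land.length : Int)) && (lget land (i + 1) j != 0)) = true) ↔
      EdgeCell land (i, j) (i + 1, j) := by
  obtain ⟨h1, h2, h3, h4⟩ := hg
  constructor
  · intro h
    rw [Bool.and_eq_true, decide_eq_true_eq] at h
    exact ⟨⟨⟨h1, h2, h3, h4⟩, hoil⟩, ⟨⟨by omega, h.1, h3, h4⟩, bne_iff_ne.mp h.2⟩,
      Or.inr rfl⟩
  · intro ⟨_, hd, _⟩
    rw [Bool.and_eq_true, decide_eq_true_eq]
    exact ⟨hd.1.2.1, bne_iff_ne.mpr hd.2⟩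

lemma enc_below {land : List (List Int)} (i j : Int) :
    encI land (i + 1, j) = j * (land.length : Int) + i + 1 := by
  rw [encI]; ring

lemma edge_no_oil {land : List (List Int)} {c d : Int × Int}
    (h : EdgeCell land c d) : lget land c.1 c.2 ≠ 0 := h.1.2

lemma edge_cases {land : List (List Int)} {i j : Int} {d : Int × Int}
    (h : EdgeCell land (i, j) d) : d = (i, j + 1) ∨ d = (i + 1, j) := h.2.2

lemma bUnionStep_inv {land : List (List Int)} {p : List Int} {P : List (Int × Int)}
    {i j : Int} (hU : UInv land p) (hR : RespB land p P)
    (hg : InGrid land.length (land.getD 0 []).length (i, j)) :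
    UInv land (bUnionStep land j p i) ∧
    RespB land (bUnionStep land j p i) (P ++ [(i, j)]) := by
  rw [bUnionStep]
  by_cases hoil : (lget land i j != 0) = true
  case neg =>
    rw [if_neg hoil]
    refine ⟨hU, ?_⟩
    intro c hc d hd
    rcases List.mem_append.mp hc with hcP | hcnew
    · exact hR c hcP d hd
    · rw [List.mem_singleton] at hcnew
      subst hcnew
      exact absurd (edge_no_oil hd) (by simpa using hoil)
  case pos =>
  rw [if_pos hoil]
  have hoil' : lget land i j ≠ 0 := bne_iff_ne.mp hoil
  have hencc := enc_lt_len hU.len hg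
  -- stage 1: the right-neighbour union
  have hstage1 : UInv land (bU1 land j p i) ∧ (bU1 land j p i).length = p.length ∧
      (∀ x y : Int, 0 ≤ x → x.toNat < p.length → 0 ≤ y → y.toNat < p.length →
        rootp land p x = rootp land p y →
        rootp land (bU1 land j p i) x = rootp land (bU1 land j p i) y) ∧
      (EdgeCell land (i, j) (i, j + 1) →
        rootp land (bU1 land j p i) (encI land (i, j)) =
          rootp land (bU1 land j p i) (encI land (i, j + 1))) := by
    rw [bU1]
    by_cases hg1 : ((decide (j + 1 < ((land.getD 0 []).length : Int)) &&
        (lget land i (j + 1) != 0)) = true)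
    · rw [if_pos hg1]
      have hedge1 : EdgeCell land (i, j) (i, j + 1) := (edge_right_iff hg hoil').mp hg1
      have hencd := enc_lt_len hU.len hedge1.2.1.1
      have heq1 : j * (land.length : Int) + i = encI land (i, j) := rfl
      have heq2 : (j + 1) * (land.length : Int) + i = encI land (i, j + 1) := rfl
      rw [heq1, heq2]
      obtain ⟨a1, a2, a3, a4⟩ := unionDSU_spec hU hencc.1 hencc.2 hencd.1 hencd.2
        (Relation.EqvGen.rel _ _ ⟨(i, j), (i, j + 1), hedge1, rfl, rfl⟩)
      exact ⟨a1, a2, a3, fun _ => a4⟩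
    · rw [if_neg hg1]
      exact ⟨hU, rfl, fun x y _ _ _ _ h => h,
        fun he => absurd ((edge_right_iff hg hoil').mpr he) hg1⟩
  obtain ⟨hU1, hlen1, htr1, hre1⟩ := hstage1
  -- stage 2: the below-neighbour union, on top of stage 1
  have hstage2 : UInv land (bU2 land j (bU1 land j p i) i) ∧
      (∀ x y : Int, 0 ≤ x → x.toNat < p.length → 0 ≤ y → y.toNat < p.length →
        rootp land (bU1 land j p i) x = rootp land (bU1 land j p i) y →
        rootp land (bU2 land j (bU1 land j p i) i) x =
          rootp land (bU2 land j (bU1 land j p i) i) y) ∧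
      (EdgeCell land (i, j) (i + 1, j) →
        rootp land (bU2 land j (bU1 land j p i) i) (encI land (i, j)) =
          rootp land (bU2 land j (bU1 land j p i) i) (encI land (i + 1, j))) := by
    rw [bU2]
    by_cases hg2 : ((decide (i + 1 < (land.length : Int)) &&
        (lget land (i + 1) j != 0)) = true)
    · rw [if_pos hg2]
      have hedge2 : EdgeCell land (i, j) (i + 1, j) := (edge_below_iff hg hoil').mp hg2
      have hencd2 := enc_lt_len hU.len hedge2.2.1.1
      have heq1 : j * (land.length : Int) + i = encI land (i, j) := rfl
      have heq2 : j * (land.length : Int) + i + 1 = encI land (i + 1, j) :=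
        (enc_below i j).symm
      rw [heq2, heq1]
      obtain ⟨a1, a2, a3, a4⟩ := unionDSU_spec hU1 hencc.1 (by rw [hlen1]; exact hencc.2)
        hencd2.1 (by rw [hlen1]; exact hencd2.2)
        (Relation.EqvGen.rel _ _ ⟨(i, j), (i + 1, j), hedge2, rfl, rfl⟩)
      refine ⟨a1, ?_, fun _ => a4⟩
      intro x y hx hxl hy hyl h
      exact a3 x y hx (by rw [hlen1]; exact hxl) hy (by rw [hlen1]; exact hyl) h
    · rw [if_neg hg2]
      exact ⟨hU1, fun x y _ _ _ _ h => h,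
        fun he => absurd ((edge_below_iff hg hoil').mpr he) hg2⟩
  obtain ⟨hU2, htr2, hre2⟩ := hstage2
  refine ⟨hU2, ?_⟩
  intro c hc d hd
  rcases List.mem_append.mp hc with hcP | hcnew
  · have hold := hR c hcP d hd
    have hc1 := enc_lt_len hU.len hd.1.1
    have hd1 := enc_lt_len hU.len hd.2.1.1
    exact htr2 _ _ hc1.1 hc1.2 hd1.1 hd1.2 (htr1 _ _ hc1.1 hc1.2 hd1.1 hd1.2 hold)
  · rw [List.mem_singleton] at hcnew
    subst hcnew
    have hc1 := enc_lt_len hU.len hd.1.1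
    have hd1 := enc_lt_len hU.len hd.2.1.1
    rcases edge_cases hd with rfl | rfl
    · exact htr2 _ _ hc1.1 hc1.2 hd1.1 hd1.2 (hre1 hd)
    · exact hre2 hd

lemma B_union_fold {land : List (List Int)} :
    ∀ (cs : List (Int × Int)) (P : List (Int × Int)) (p : List Int),
    (∀ c ∈ cs, InGrid land.length (land.getD 0 []).length c) →
    UInv land p → RespB land p P →
    UInv land (cs.foldl (fun p c => bUnionStep land c.2 p c.1) p) ∧
    RespB land (cs.foldl (fun p c => bUnionStep land c.2 p c.1) p) (P ++ cs) := by
  intro cs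
  induction cs with
  | nil => intro P p _ hU hR; simpa using ⟨hU, hR⟩
  | cons c cs ih =>
      intro P p hcs hU hR
      have hc := hcs c List.mem_cons_self
      obtain ⟨hU', hR'⟩ := bUnionStep_inv (i := c.1) (j := c.2) hU hR hc
      rw [List.foldl_cons]
      have := ih (P ++ [c]) (bUnionStep land c.2 p c.1)
        (fun d hd => hcs d (List.mem_cons_of_mem _ hd)) hU' (by simpa using hR')
      simpa [List.append_assoc] using this

def parent0 (land : List (List Int)) : List Int :=
  PySem.List.pyRange 0 ((land.length * (land.getD 0 []).length : Nat) : Int) 1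

def parentF (land : List (List Int)) : List Int :=
  (colCells land).foldl (fun p c => bUnionStep land c.2 p c.1) (parent0 land)

lemma parent0_len (land : List (List Int)) :
    (parent0 land).length = land.length * (land.getD 0 []).length := by
  rw [parent0, PySem.List.length_pyRange_one]
  omega

lemma parent0_getD {land : List (List Int)} {k : Nat}
    (hk : k < land.length * (land.getD 0 []).length) :
    (parent0 land).getD k 0 = (k : Int) := by
  have hlen : k < (parent0 land).length := by rw [parent0_len]; exact hk
  rw [List.getD_eq_getElem _ _ hlen]
  simp only [parent0, PySem.List.getElem_pyRange_one]
  omega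

lemma parent0_inv (land : List (List Int)) : UInv land (parent0 land) := by
  refine ⟨parent0_len land, ?_, ?_⟩
  · intro k hk
    rw [parent0_len] at hk
    rw [parent0_getD hk]
    omega
  · intro k hk
    rw [parent0_len] at hk
    rw [parent0_getD hk]
    exact Relation.EqvGen.refl _

lemma parentF_inv (land : List (List Int)) :
    UInv land (parentF land) ∧ RespB land (parentF land) (colCells land) := by
  have := B_union_fold (colCells land) [] (parent0 land) colCells_grid
    (parent0_inv land) (fun c hc => absurd hc List.not_mem_nil)
  simpa using this

lemma mem_colCells {land : List (List Int)} {c : Int × Int} :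
    c ∈ colCells land ↔ InGrid land.length (land.getD 0 []).length c := by
  constructor
  · exact colCells_grid c
  · intro hg
    rw [colCells, List.mem_flatMap]
    refine ⟨c.2, PySem.List.mem_pyRange_one.mpr ⟨hg.2.2.1, hg.2.2.2⟩, ?_⟩
    rw [List.mem_map]
    exact ⟨c.1, PySem.List.mem_pyRange_one.mpr ⟨hg.1, hg.2.1⟩, rfl⟩

/- roots of the finished union-find agree exactly on the edge-equivalence classes -/
lemma rootp_iff {land : List (List Int)} {a b : Int}
    (ha0 : 0 ≤ a) (halen : a.toNat < (parentF land).length)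
    (hb0 : 0 ≤ b) (hblen : b.toNat < (parentF land).length) :
    rootp land (parentF land) a = rootp land (parentF land) b ↔
      Relation.EqvGen (ER land) a b := by
  obtain ⟨hU, hResp⟩ := parentF_inv land
  constructor
  · intro h
    exact Relation.EqvGen.trans _ _ _ (rootp_eqv hU ha0 halen)
      (h ▸ Relation.EqvGen.symm _ _ (rootp_eqv hU hb0 hblen))
  · intro h
    clear ha0 halen hb0 hblen
    induction h with
    | rel x y hxy =>
        obtain ⟨c, d, hcd, rfl, rfl⟩ := hxy
        exact hResp c (mem_colCells.mpr hcd.1.1) d hcd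
    | refl x => rfl
    | symm x y _ ih => exact ih.symm
    | trans x y z _ _ ih1 ih2 => exact ih1.trans ih2

/- every EqvGen chain is either trivial or runs between oil cells of one component -/
lemma eqvgen_structure {land : List (List Int)} {a b : Int}
    (h : Relation.EqvGen (ER land) a b) :
    a = b ∨ ∃ c d, OilP land c ∧ OilP land d ∧ a = encI land c ∧ b = encI land d ∧
      Conn land c d := by
  induction h with
  | rel x y hxy =>
      obtain ⟨c, d, hcd, rfl, rfl⟩ := hxy
      refine Or.inr ⟨c, d, hcd.1, hcd.2.1, rfl, rfl, ⟨hcd.1, ?_⟩⟩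
      refine Relation.ReflTransGen.single ⟨?_, hcd.2.1⟩
      rcases hcd.2.2 with rfl | rfl
      · exact Or.inl ⟨rfl, Or.inr rfl⟩
      · exact Or.inr ⟨rfl, Or.inr rfl⟩
  | refl x => exact Or.inl rfl
  | symm x y _ ih =>
      rcases ih with h | ⟨c, d, h1, h2, h3, h4, h5⟩
      · exact Or.inl h.symm
      · exact Or.inr ⟨d, c, h2, h1, h4, h3, conn_symm h5⟩
  | trans x y z _ _ ih1 ih2 =>
      rcases ih1 with h | ⟨c, d, h1, h2, h3, h4, h5⟩
      · rcases ih2 with h' | h'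
        · exact Or.inl (h.trans h')
        · subst h; exact Or.inr h'
      · rcases ih2 with h' | ⟨c', d', h1', h2', h3', h4', h5'⟩
        · exact Or.inr ⟨c, d, h1, h2, h3, h' ▸ h4, h5⟩
        · have hdc' : d = c' := encI_inj h2.1 h1'.1 (h4.symm.trans h3')
          subst hdc'
          exact Or.inr ⟨c, d', h1, h2', h3, h4', conn_trans h5 h5'⟩

lemma conn_to_eqv {land : List (List Int)} {c d : Int × Int}
    (h : Conn land c d) :
    Relation.EqvGen (ER land) (encI land c) (encI land d) := by
  obtain ⟨hc, hchain⟩ := h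
  induction hchain with
  | refl => exact Relation.EqvGen.refl _
  | @tail b e h1 h2 ih =>
      have hb : OilP land b := conn_oil ⟨hc, h1⟩
      refine Relation.EqvGen.trans _ _ _ ih ?_
      obtain ⟨b1, b2⟩ := b
      rcases (adjP_iff b1 b2 e).mp h2.1 with rfl | rfl | rfl | rfl
      · -- e = (b1 - 1, b2): b is e's below neighbour
        refine Relation.EqvGen.symm _ _ (Relation.EqvGen.rel _ _
          ⟨(b1 - 1, b2), (b1, b2), ⟨h2.2, hb, Or.inr ?_⟩, rfl, rfl⟩)
        simp
      · exact Relation.EqvGen.rel _ _ ⟨(b1, b2), (b1 + 1, b2), ⟨hb, h2.2, Or.inr rfl⟩, rfl, rfl⟩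
      · refine Relation.EqvGen.symm _ _ (Relation.EqvGen.rel _ _
          ⟨(b1, b2 - 1), (b1, b2), ⟨h2.2, hb, Or.inl ?_⟩, rfl, rfl⟩)
        simp
      · exact Relation.EqvGen.rel _ _ ⟨(b1, b2), (b1, b2 + 1), ⟨hb, h2.2, Or.inl rfl⟩, rfl, rfl⟩

/- the key B-side fact: equal roots ⟺ same component (for oil cells) -/
lemma root_conn {land : List (List Int)} {c d : Int × Int}
    (hc : OilP land c) (hd : OilP land d) :
    rootp land (parentF land) (encI land c) = rootp land (parentF land) (encI land d) ↔
      Conn land c d := by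
  have hlen := (parentF_inv land).1.len
  have hcb := enc_lt_len hlen hc.1
  have hdb := enc_lt_len hlen hd.1
  rw [rootp_iff hcb.1 hcb.2 hdb.1 hdb.2]
  constructor
  · intro h
    rcases eqvgen_structure h with h | ⟨c', d', h1, h2, h3, h4, h5⟩
    · have := encI_inj hc.1 hd.1 h
      subst this
      exact conn_refl hc
    · have h6 : c' = c := encI_inj h1.1 hc.1 h3.symm
      have h7 : d' = d := encI_inj h2.1 hd.1 h4.symm
      subst h6; subst h7
      exact h5
  · exact conn_to_eqv

/- ===== B's aggregation pass: per-root size / min col / max col dictionaries ===== -/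

noncomputable def rtF (land : List (List Int)) (s : Int × Int) : Int :=
  rootp land (parentF land) (encI land s)

lemma rtF_eq_iff {land : List (List Int)} {s c : Int × Int}
    (hs : OilP land s) (hc : OilP land c) :
    rtF land s = rtF land c ↔ Conn land s c := root_conn hs hc

noncomputable def filterC (land : List (List Int)) (s : Int × Int)
    (P : List (Int × Int)) : List (Int × Int) :=
  P.filter (fun c => decide (c ∈ compF land s))

noncomputable def colsC (land : List (List Int)) (s : Int × Int)
    (P : List (Int × Int)) : Finset Int :=
  ((filterC land s P).map Prod.snd).toFinset

lemma filterC_append_mem {land : List (List Int)} {s : Int × Int}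
    {P : List (Int × Int)} {c : Int × Int} (h : c ∈ compF land s) :
    filterC land s (P ++ [c]) = filterC land s P ++ [c] := by
  rw [filterC, List.filter_append, filterC]
  congr 1
  simp [h]

lemma filterC_append_not_mem {land : List (List Int)} {s : Int × Int}
    {P : List (Int × Int)} {c : Int × Int} (h : c ∉ compF land s) :
    filterC land s (P ++ [c]) = filterC land s P := by
  rw [filterC, List.filter_append, filterC]
  simp [h]

/- the body of B's aggregation pass for one cell -/
def bAggStep (land : List (List Int)) (p : List Int) (j : Int)
    (st : PySem.Dict Int Int × PySem.Dict Int Int × PySem.Dict Int Int) (i : Int) :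
    PySem.Dict Int Int × PySem.Dict Int Int × PySem.Dict Int Int :=
  if lget land i j != 0 then
    let r := findRoot p (land.length * (land.getD 0 []).length)
      (j * (land.length : Int) + i)
    (st.1.insert r (st.1.getD r 0 + 1),
     st.2.1.insert r (min (st.2.1.getD r j) j),
     st.2.2.insert r (max (st.2.2.getD r j) j))
  else st

structure RelAgg (land : List (List Int))
    (st : PySem.Dict Int Int × PySem.Dict Int Int × PySem.Dict Int Int)
    (cst : Finset (Int × Int) × List (Int × Int)) (P : List (Int × Int)) : Prop where
  keys1 : st.1.keys = cst.2.map (rtF land)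
  keys2 : st.2.1.keys = st.1.keys
  keys3 : st.2.2.keys = st.1.keys
  seedsP : ∀ s ∈ cst.2, s ∈ P
  oilV : ∀ d ∈ P, OilP land d → d ∈ cst.1
  vals : ∀ s ∈ cst.2,
    st.1.get? (rtF land s) = some (((filterC land s P).length : Int)) ∧
    st.2.1.get? (rtF land s) = some (WithTop.untopD 0 (colsC land s P).min) ∧
    st.2.2.get? (rtF land s) = some (WithBot.unbotD 0 (colsC land s P).max)

lemma relAgg_init (land : List (List Int)) :
    RelAgg land (PySem.Dict.empty, PySem.Dict.empty, PySem.Dict.empty) (∅, []) [] := by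
  refine ⟨by simp, by simp, by simp, ?_, ?_, ?_⟩
  · intro s hs; exact absurd hs List.not_mem_nil
  · intro d hd; exact absurd hd List.not_mem_nil
  · intro s hs; exact absurd hs List.not_mem_nil

lemma bAgg_step {land : List (List Int)} {i j : Int}
    {st : PySem.Dict Int Int × PySem.Dict Int Int × PySem.Dict Int Int}
    {cst : Finset (Int × Int) × List (Int × Int)} {P : List (Int × Int)}
    (hg : InGrid land.length (land.getD 0 []).length (i, j))
    (hrel : RelAgg land st cst P) (hinv : CanonInv land cst) :
    RelAgg land (bAggStep land (parentF land) j st i) (canonStep land cst (i, j))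
      (P ++ [(i, j)]) := by
  have hrdef : findRoot (parentF land) (land.length * (land.getD 0 []).length)
      (j * (land.length : Int) + i) = rtF land (i, j) := rfl
  by_cases hoil : (lget land i j != 0) = true
  case neg =>
    -- no oil here: nothing changes on either side
    have hstep : bAggStep land (parentF land) j st i = st := by
      rw [bAggStep, if_neg hoil]
    have hnoil : ¬ OilP land (i, j) := fun ho => hoil (by simp [bne_iff_ne, ho.2])
    have hcstep : canonStep land cst (i, j) = cst := by
      rw [canonStep, if_neg (fun hco => hnoil hco.1)]
    rw [hstep, hcstep]
    refine ⟨hrel.keys1, hrel.keys2, hrel.keys3, ?_, ?_, ?_⟩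
    · intro s hs; exact List.mem_append.mpr (Or.inl (hrel.seedsP s hs))
    · intro d hd ho
      rcases List.mem_append.mp hd with h | h
      · exact hrel.oilV d h ho
      · rw [List.mem_singleton] at h; subst h; exact absurd ho hnoil
    · intro s hs
      have hnc : (i, j) ∉ compF land s := fun hmem => hnoil (conn_oil (mem_compF.mp hmem))
      rw [filterC_append_not_mem hnc, colsC, filterC_append_not_mem hnc, ← colsC]
      exact hrel.vals s hs
  case pos =>
  have hoil' : OilP land (i, j) := ⟨hg, bne_iff_ne.mp hoil⟩
  have hstep : bAggStep land (parentF land) j st i =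
      (st.1.insert (rtF land (i, j)) (st.1.getD (rtF land (i, j)) 0 + 1),
       st.2.1.insert (rtF land (i, j)) (min (st.2.1.getD (rtF land (i, j)) j) j),
       st.2.2.insert (rtF land (i, j)) (max (st.2.2.getD (rtF land (i, j)) j) j)) := by
    rw [bAggStep, if_pos hoil, hrdef]
  rw [hstep]
  -- a root key of a seed equals the new key iff the seed's component contains (i, j)
  have hkey : ∀ s ∈ cst.2, (rtF land s = rtF land (i, j) ↔ Conn land s (i, j)) :=
    fun s hs => rtF_eq_iff (hinv.seedsOil s hs) hoil'
  by_cases hV : (i, j) ∈ cst.1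
  · -- already-seen component: the key exists, counters are bumped
    have hcstep : canonStep land cst (i, j) = cst := by
      rw [canonStep, if_neg (fun hco => hco.2 hV)]
    rw [hcstep]
    obtain ⟨s0, hs0L, hs0c⟩ := (hinv.cover (i, j)).mp hV
    have hs0r : rtF land s0 = rtF land (i, j) := (hkey s0 hs0L).mpr hs0c
    have hrk : rtF land (i, j) ∈ st.1.keys := by
      rw [hrel.keys1, List.mem_map]
      exact ⟨s0, hs0L, hs0r⟩
    have hc1 : st.1.contains (rtF land (i, j)) = true :=
      (PySem.Dict.contains_iff_mem_keys _ _).mpr hrk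
    have hc2 : st.2.1.contains (rtF land (i, j)) = true :=
      (PySem.Dict.contains_iff_mem_keys _ _).mpr (by rw [hrel.keys2]; exact hrk)
    have hc3 : st.2.2.contains (rtF land (i, j)) = true :=
      (PySem.Dict.contains_iff_mem_keys _ _).mpr (by rw [hrel.keys3]; exact hrk)
    refine ⟨?_, ?_, ?_, ?_, ?_, ?_⟩
    · rw [PySem.Dict.keys_insert_of_contains _ _ hc1]; exact hrel.keys1
    · rw [PySem.Dict.keys_insert_of_contains _ _ hc2,
        PySem.Dict.keys_insert_of_contains _ _ hc1]; exact hrel.keys2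
    · rw [PySem.Dict.keys_insert_of_contains _ _ hc3,
        PySem.Dict.keys_insert_of_contains _ _ hc1]; exact hrel.keys3
    · intro s hs; exact List.mem_append.mpr (Or.inl (hrel.seedsP s hs))
    · intro d hd ho
      rcases List.mem_append.mp hd with h | h
      · exact hrel.oilV d h ho
      · rw [List.mem_singleton] at h; subst h; exact hV
    · intro s hs
      obtain ⟨hv1, hv2, hv3⟩ := hrel.vals s hs
      by_cases hsc : Conn land s (i, j)
      · -- this seed's component got one more cell
        have hsr : rtF land s = rtF land (i, j) := (hkey s hs).mpr hsc
        have hmem : (i, j) ∈ compF land s := mem_compF.mpr hsc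
        have hsP : s ∈ filterC land s P := by
          rw [filterC, List.mem_filter]
          exact ⟨hrel.seedsP s hs, by simp [mem_compF.mpr (conn_refl (hinv.seedsOil s hs))]⟩
        have hne : (colsC land s P).Nonempty := by
          refine ⟨s.2, ?_⟩
          rw [colsC, List.mem_toFinset, List.mem_map]
          exact ⟨s, hsP, rfl⟩
        obtain ⟨lov, hlov⟩ := Finset.min_of_nonempty hne
        obtain ⟨hiv, hhiv⟩ := Finset.max_of_nonempty hne
        have hcols : colsC land s (P ++ [(i, j)]) = insert j (colsC land s P) := by
          rw [colsC, filterC_append_mem hmem, List.map_append, List.toFinset_append,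
            show ([(i, j)].map Prod.snd).toFinset = ({j} : Finset Int) by simp,
            Finset.union_singleton]
          rfl
        rw [hsr] at hv1 hv2 hv3
        refine ⟨?_, ?_, ?_⟩
        · rw [hsr, PySem.Dict.get?_insert, if_pos rfl,
            PySem.Dict.getD_eq_get?_getD, hv1]
          rw [filterC_append_mem hmem]
          simp [List.length_append]
        · rw [hsr, PySem.Dict.get?_insert, if_pos rfl,
            PySem.Dict.getD_eq_get?_getD, hv2]
          rw [hcols, Finset.min_insert, hlov]
          simp only [Option.getD_some]
          rw [WithTop.untopD_coe, ← WithTop.coe_min, WithTop.untopD_coe, min_comm]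
        · rw [hsr, PySem.Dict.get?_insert, if_pos rfl,
            PySem.Dict.getD_eq_get?_getD, hv3]
          rw [hcols, Finset.max_insert, hhiv]
          simp only [Option.getD_some]
          rw [WithBot.unbotD_coe, ← WithBot.coe_max, WithBot.unbotD_coe, max_comm]
      · -- untouched component: different key, nothing changes
        have hsr : rtF land s ≠ rtF land (i, j) := fun h => hsc ((hkey s hs).mp h)
        have hnc : (i, j) ∉ compF land s := fun h => hsc (mem_compF.mp h)
        rw [filterC_append_not_mem hnc, colsC, filterC_append_not_mem hnc, ← colsC]
        refine ⟨?_, ?_, ?_⟩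
        · rw [PySem.Dict.get?_insert, if_neg hsr]; exact hv1
        · rw [PySem.Dict.get?_insert, if_neg hsr]; exact hv2
        · rw [PySem.Dict.get?_insert, if_neg hsr]; exact hv3
  · -- fresh component: a new key is appended to all three dictionaries
    have hcstep : canonStep land cst (i, j) =
        (cst.1 ∪ compF land (i, j), cst.2 ++ [(i, j)]) := by
      rw [canonStep, if_pos ⟨hoil', hV⟩]
    rw [hcstep]
    have hfresh : rtF land (i, j) ∉ st.1.keys := by
      rw [hrel.keys1, List.mem_map]
      rintro ⟨s, hs, hsr⟩
      exact hV ((hinv.cover (i, j)).mpr ⟨s, hs, (hkey s hs).mp hsr⟩)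
    have hnc1 : st.1.contains (rtF land (i, j)) = false := by
      cases hcc : st.1.contains (rtF land (i, j))
      · rfl
      · exact absurd ((PySem.Dict.contains_iff_mem_keys _ _).mp hcc) hfresh
    have hnc2 : st.2.1.contains (rtF land (i, j)) = false := by
      cases hcc : st.2.1.contains (rtF land (i, j))
      · rfl
      · refine absurd ((PySem.Dict.contains_iff_mem_keys _ _).mp hcc) ?_
        rw [hrel.keys2]; exact hfresh
    have hnc3 : st.2.2.contains (rtF land (i, j)) = false := by
      cases hcc : st.2.2.contains (rtF land (i, j))
      · rfl
      · refine absurd ((PySem.Dict.contains_iff_mem_keys _ _).mp hcc) ?_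
        rw [hrel.keys3]; exact hfresh
    -- no processed cell lies in the new component
    have hPnone : ∀ d ∈ P, d ∉ compF land (i, j) := by
      intro d hd hmem
      have hconn := mem_compF.mp hmem
      have hdV : d ∈ cst.1 := hrel.oilV d hd (conn_oil hconn)
      obtain ⟨s, hs, hsd⟩ := (hinv.cover d).mp hdV
      exact hV ((hinv.cover (i, j)).mpr ⟨s, hs, conn_trans hsd (conn_symm hconn)⟩)
    have hfilterP : filterC land (i, j) P = [] := by
      rw [filterC, List.filter_eq_nil_iff]
      intro d hd
      simp [hPnone d hd]
    refine ⟨?_, ?_, ?_, ?_, ?_, ?_⟩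
    · rw [PySem.Dict.keys_insert_of_not_contains _ _ hnc1, hrel.keys1, List.map_append]
      rfl
    · rw [PySem.Dict.keys_insert_of_not_contains _ _ hnc2,
        PySem.Dict.keys_insert_of_not_contains _ _ hnc1, hrel.keys2]
    · rw [PySem.Dict.keys_insert_of_not_contains _ _ hnc3,
        PySem.Dict.keys_insert_of_not_contains _ _ hnc1, hrel.keys3]
    · intro s hs
      rcases List.mem_append.mp hs with h | h
      · exact List.mem_append.mpr (Or.inl (hrel.seedsP s h))
      · exact List.mem_append.mpr (Or.inr h)
    · intro d hd ho
      rcases List.mem_append.mp hd with h | h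
      · exact Finset.mem_union_left _ (hrel.oilV d h ho)
      · rw [List.mem_singleton] at h; subst h
        exact Finset.mem_union_right _ (mem_compF.mpr (conn_refl hoil'))
    · intro s hs
      rcases List.mem_append.mp hs with h | h
      · -- old seeds: their component does not contain (i, j)
        obtain ⟨hv1, hv2, hv3⟩ := hrel.vals s h
        have hsc : ¬ Conn land s (i, j) :=
          fun hc => hV ((hinv.cover (i, j)).mpr ⟨s, h, hc⟩)
        have hsr : rtF land s ≠ rtF land (i, j) := fun hr => hsc ((hkey s h).mp hr)
        have hnc : (i, j) ∉ compF land s := fun hm => hsc (mem_compF.mp hm)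
        rw [filterC_append_not_mem hnc, colsC, filterC_append_not_mem hnc, ← colsC]
        refine ⟨?_, ?_, ?_⟩
        · rw [PySem.Dict.get?_insert, if_neg hsr]; exact hv1
        · rw [PySem.Dict.get?_insert, if_neg hsr]; exact hv2
        · rw [PySem.Dict.get?_insert, if_neg hsr]; exact hv3
      · rw [List.mem_singleton] at h; subst h
        have hmem : (i, j) ∈ compF land (i, j) := mem_compF.mpr (conn_refl hoil')
        have hfilter : filterC land (i, j) (P ++ [(i, j)]) = [(i, j)] := by
          rw [filterC_append_mem hmem, hfilterP]
          rfl
        have hcols : colsC land (i, j) (P ++ [(i, j)]) = {j} := by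
          rw [colsC, hfilter]
          rfl
        refine ⟨?_, ?_, ?_⟩
        · rw [PySem.Dict.get?_insert, if_pos rfl, PySem.Dict.getD_eq_get?_getD]
          rw [(PySem.Dict.get?_eq_none_iff_not_mem_keys _ _).mpr hfresh]
          rw [hfilter]
          rfl
        · rw [PySem.Dict.get?_insert, if_pos rfl, PySem.Dict.getD_eq_get?_getD]
          rw [(PySem.Dict.get?_eq_none_iff_not_mem_keys _ _).mpr
            (by rw [hrel.keys2]; exact hfresh)]
          rw [hcols]
          simp
        · rw [PySem.Dict.get?_insert, if_pos rfl, PySem.Dict.getD_eq_get?_getD]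
          rw [(PySem.Dict.get?_eq_none_iff_not_mem_keys _ _).mpr
            (by rw [hrel.keys3]; exact hfresh)]
          rw [hcols]
          simp

lemma B_agg_fold {land : List (List Int)} :
    ∀ (cs : List (Int × Int))
      {st : PySem.Dict Int Int × PySem.Dict Int Int × PySem.Dict Int Int}
      {cst : Finset (Int × Int) × List (Int × Int)} {P : List (Int × Int)},
    (∀ c ∈ cs, InGrid land.length (land.getD 0 []).length c) →
    RelAgg land st cst P → CanonInv land cst →
    RelAgg land (cs.foldl (fun st c => bAggStep land (parentF land) c.2 st c.1) st)
      (cs.foldl (canonStep land) cst) (P ++ cs) := by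
  intro cs
  induction cs with
  | nil => intro st cst P _ h _; simpa using h
  | cons c cs ih =>
      intro st cst P hcs hrel hinv
      have hc := hcs c List.mem_cons_self
      have hstep := bAgg_step (i := c.1) (j := c.2) hc hrel hinv
      rw [List.foldl_cons, List.foldl_cons]
      have := ih (fun d hd => hcs d (List.mem_cons_of_mem _ hd))
        (by simpa using hstep) (canonStep_inv hinv c)
      simpa [List.append_assoc] using this

lemma colCells_nodup (land : List (List Int)) : (colCells land).Nodup := by
  rw [colCells, List.nodup_flatMap]
  constructor
  · intro j _
    exact (PySem.List.nodup_pyRange_one _ _).map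
      (fun a b h => by simpa using (Prod.mk.injEq _ _ _ _).mp h |>.1)
  · refine (PySem.List.pairwise_lt_pyRange_one _ _).imp ?_
    intro j1 j2 hlt a ha hb
    rw [List.mem_map] at ha hb
    obtain ⟨i1, _, rfl⟩ := ha
    obtain ⟨i2, _, h2⟩ := hb
    have : j2 = j1 := congrArg Prod.snd h2
    omega

lemma filterC_colCells_toFinset (land : List (List Int)) (s : Int × Int) :
    (filterC land s (colCells land)).toFinset = compF land s := by
  ext d
  rw [List.mem_toFinset, filterC, List.mem_filter]
  constructor
  · intro ⟨_, h⟩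
    simpa using h
  · intro h
    exact ⟨mem_colCells.mpr (conn_oil (mem_compF.mp h)).1, by simpa using h⟩

lemma filterC_colCells_length (land : List (List Int)) (s : Int × Int) :
    (filterC land s (colCells land)).length = (compF land s).card := by
  have hnd : (filterC land s (colCells land)).Nodup :=
    (colCells_nodup land).filter _
  rw [← filterC_colCells_toFinset land s, List.toFinset_card_of_nodup hnd]

lemma colsC_colCells (land : List (List Int)) (s : Int × Int) :
    colsC land s (colCells land) = (compF land s).image Prod.snd := by
  have hmem : ∀ a : Int × Int, a ∈ filterC land s (colCells land) ↔ a ∈ compF land s := by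
    intro a
    rw [← filterC_colCells_toFinset land s, List.mem_toFinset]
  ext x
  simp only [colsC, List.mem_toFinset, List.mem_map, Finset.mem_image]
  constructor
  · rintro ⟨a, ha, rfl⟩
    exact ⟨a, (hmem a).mp ha, rfl⟩
  · rintro ⟨a, ha, rfl⟩
    exact ⟨a, (hmem a).mpr ha, rfl⟩

/- the final loop of B: folding the per-root triples into the zero row -/
lemma B_result (land : List (List Int)) (sz lo hi : PySem.Dict Int Int) :
    ∀ (L : List (Int × Int)) (z : List Int),
    sz.keys = L.map (rtF land) →
    (∀ s ∈ L,
      sz.get? (rtF land s) = some (tripleOf (compF land s)).1 ∧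
      lo.get? (rtF land s) = some (tripleOf (compF land s)).2.1 ∧
      hi.get? (rtF land s) = some (tripleOf (compF land s)).2.2) →
    sz.keys.foldl (fun res r =>
      (PySem.List.pyRange (lo.getD r 0) (hi.getD r 0 + 1) 1).foldl
        (fun res c => res.set c.toNat (res.getD c.toNat 0 + sz.getD r 0)) res) z =
    (L.map (fun s => tripleOf (compF land s))).foldl addComp z := by
  intro L z hkeys hvals
  rw [hkeys, List.foldl_map, List.foldl_map]
  clear hkeys
  induction L generalizing z with
  | nil => rfl
  | cons s L ih =>
      rw [List.foldl_cons, List.foldl_cons]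
      obtain ⟨hv1, hv2, hv3⟩ := hvals s List.mem_cons_self
      have hbody : (PySem.List.pyRange (lo.getD (rtF land s) 0)
          (hi.getD (rtF land s) 0 + 1) 1).foldl
          (fun res c => res.set c.toNat (res.getD c.toNat 0 + sz.getD (rtF land s) 0)) z =
          addComp z (tripleOf (compF land s)) := by
        rw [PySem.Dict.getD_eq_get?_getD, PySem.Dict.getD_eq_get?_getD,
          PySem.Dict.getD_eq_get?_getD, hv1, hv2, hv3]
        rfl
      rw [hbody]
      exact ih _ (fun t ht => hvals t (List.mem_cons_of_mem _ ht))

/- turning the nested column/row folds into one fold over colCells -/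
lemma foldl_nested_eq_colCells {σ : Type} (land : List (List Int))
    (g : σ → Int → Int → σ) (s0 : σ) :
    (PySem.List.pyRange 0 (((land.getD 0 []).length : Nat) : Int) 1).foldl
      (fun st j => (PySem.List.pyRange 0 ((land.length : Nat) : Int) 1).foldl
        (fun st i => g st j i) st) s0 =
    (colCells land).foldl (fun st c => g st c.2 c.1) s0 := by
  rw [colCells]
  generalize (PySem.List.pyRange 0 (((land.getD 0 []).length : Nat) : Int) 1) = js
  induction js generalizing s0 with
  | nil => rfl
  | cons j js ih =>
      rw [List.foldl_cons, List.flatMap_cons, List.foldl_append, ih]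
      congr 1
      generalize (PySem.List.pyRange 0 ((land.length : Nat) : Int) 1) = is
      induction is generalizing s0 with
      | nil => rfl
      | cons i is ih2 => rw [List.foldl_cons, List.map_cons, List.foldl_cons, ih2]

/- B's full program: the same canonical triples folded into the zero row -/
lemma B_char (land : List (List Int)) :
    solution_alt land =
      (PySem.List.max? (((canonFin land).2.map (fun s => tripleOf (compF land s))).foldl
        addComp (zerosM land)) (fun y => y)).getD 0 := by
  have hparent : (PySem.List.pyRange 0 (((land.getD 0 []).length : Nat) : Int) 1).foldl
      (fun p j => (PySem.List.pyRange 0 ((land.length : Nat) : Int) 1).foldl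
        (fun p i => bUnionStep land j p i) p) (parent0 land) = parentF land :=
    foldl_nested_eq_colCells land (fun p j i => bUnionStep land j p i) (parent0 land)
  have hagg : (PySem.List.pyRange 0 (((land.getD 0 []).length : Nat) : Int) 1).foldl
      (fun st j => (PySem.List.pyRange 0 ((land.length : Nat) : Int) 1).foldl
        (fun st i => bAggStep land (parentF land) j st i) st)
      ((PySem.Dict.empty : PySem.Dict Int Int), (PySem.Dict.empty : PySem.Dict Int Int),
       (PySem.Dict.empty : PySem.Dict Int Int)) =
      (colCells land).foldl (fun st c => bAggStep land (parentF land) c.2 st c.1)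
      ((PySem.Dict.empty : PySem.Dict Int Int), (PySem.Dict.empty : PySem.Dict Int Int),
       (PySem.Dict.empty : PySem.Dict Int Int)) :=
    foldl_nested_eq_colCells land (fun st j i => bAggStep land (parentF land) j st i) _
  have hrel : RelAgg land
      ((colCells land).foldl (fun st c => bAggStep land (parentF land) c.2 st c.1)
        ((PySem.Dict.empty : PySem.Dict Int Int), (PySem.Dict.empty : PySem.Dict Int Int),
         (PySem.Dict.empty : PySem.Dict Int Int)))
      (canonFin land) (colCells land) := by
    have := B_agg_fold (colCells land) colCells_grid (relAgg_init land) (canonInv_init land)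
    simpa [canonFin] using this
  set dicts := (colCells land).foldl (fun st c => bAggStep land (parentF land) c.2 st c.1)
    ((PySem.Dict.empty : PySem.Dict Int Int), (PySem.Dict.empty : PySem.Dict Int Int),
     (PySem.Dict.empty : PySem.Dict Int Int)) with hdicts
  have hvals : ∀ s ∈ (canonFin land).2,
      dicts.1.get? (rtF land s) = some (tripleOf (compF land s)).1 ∧
      dicts.2.1.get? (rtF land s) = some (tripleOf (compF land s)).2.1 ∧
      dicts.2.2.get? (rtF land s) = some (tripleOf (compF land s)).2.2 := by
    intro s hs
    obtain ⟨hv1, hv2, hv3⟩ := hrel.vals s hs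
    refine ⟨?_, ?_, ?_⟩
    · rw [hv1, filterC_colCells_length]; rfl
    · rw [hv2, colsC_colCells]; rfl
    · rw [hv3, colsC_colCells]; rfl
  have hres := B_result land dicts.1 dicts.2.1 dicts.2.2 (canonFin land).2
    (zerosM land) hrel.keys1 hvals
  show (PySem.List.max? ((
      (PySem.List.pyRange 0 (((land.getD 0 []).length : Nat) : Int) 1).foldl
        (fun st j => (PySem.List.pyRange 0 ((land.length : Nat) : Int) 1).foldl
          (fun st i => bAggStep land
            ((PySem.List.pyRange 0 (((land.getD 0 []).length : Nat) : Int) 1).foldl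
              (fun p j => (PySem.List.pyRange 0 ((land.length : Nat) : Int) 1).foldl
                (fun p i => bUnionStep land j p i) p) (parent0 land)) j st i) st)
        ((PySem.Dict.empty : PySem.Dict Int Int), (PySem.Dict.empty : PySem.Dict Int Int),
         (PySem.Dict.empty : PySem.Dict Int Int))).1.keys.foldl (fun res r =>
      (PySem.List.pyRange ((
      (PySem.List.pyRange 0 (((land.getD 0 []).length : Nat) : Int) 1).foldl
        (fun st j => (PySem.List.pyRange 0 ((land.length : Nat) : Int) 1).foldl
          (fun st i => bAggStep land
            ((PySem.List.pyRange 0 (((land.getD 0 []).length : Nat) : Int) 1).foldl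
              (fun p j => (PySem.List.pyRange 0 ((land.length : Nat) : Int) 1).foldl
                (fun p i => bUnionStep land j p i) p) (parent0 land)) j st i) st)
        ((PySem.Dict.empty : PySem.Dict Int Int), (PySem.Dict.empty : PySem.Dict Int Int),
         (PySem.Dict.empty : PySem.Dict Int Int))).2.1.getD r 0) ((
      (PySem.List.pyRange 0 (((land.getD 0 []).length : Nat) : Int) 1).foldl
        (fun st j => (PySem.List.pyRange 0 ((land.length : Nat) : Int) 1).foldl
          (fun st i => bAggStep land
            ((PySem.List.pyRange 0 (((land.getD 0 []).length : Nat) : Int) 1).foldl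
              (fun p j => (PySem.List.pyRange 0 ((land.length : Nat) : Int) 1).foldl
                (fun p i => bUnionStep land j p i) p) (parent0 land)) j st i) st)
        ((PySem.Dict.empty : PySem.Dict Int Int), (PySem.Dict.empty : PySem.Dict Int Int),
         (PySem.Dict.empty : PySem.Dict Int Int))).2.2.getD r 0 + 1) 1).foldl
        (fun res c => res.set c.toNat (res.getD c.toNat 0 + ((
      (PySem.List.pyRange 0 (((land.getD 0 []).length : Nat) : Int) 1).foldl
        (fun st j => (PySem.List.pyRange 0 ((land.length : Nat) : Int) 1).foldl
          (fun st i => bAggStep land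
            ((PySem.List.pyRange 0 (((land.getD 0 []).length : Nat) : Int) 1).foldl
              (fun p j => (PySem.List.pyRange 0 ((land.length : Nat) : Int) 1).foldl
                (fun p i => bUnionStep land j p i) p) (parent0 land)) j st i) st)
        ((PySem.Dict.empty : PySem.Dict Int Int), (PySem.Dict.empty : PySem.Dict Int Int),
         (PySem.Dict.empty : PySem.Dict Int Int))).1.getD r 0))) res)
      (List.replicate (land.getD 0 []).length (0 : Int))) (fun y => y)).getD 0 = _
  rw [hparent, hagg]
  rw [show (List.replicate (land.getD 0 []).length (0 : Int)) = zerosM land from rfl]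
  rw [hres]

-- ===== VERDICT (by name: the statement is the Claim_ definition above) =====
theorem solution_spec : Claim_equal_solution := by
  intro land _ _
  unfold Spec_solution
  rw [A_char, B_char]
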